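-- pv_equiv track=rewrite | github.com/abhi-wadhwa/stable-matching | src/core/hospital_resident.py | _hospital_proposing_da
-- ===== SOURCE A (Python) =====
-- from collections import deque
-- from typing import Dict, List, Optional, Set, Tuple
--
-- def _hospital_proposing_da(
--     resident_prefs: Dict[str, List[str]],
--     hospital_prefs: Dict[str, List[str]],
--     quotas: Dict[str, int],
-- ) -> Dict[str, List[str]]:
--     """Hospital-proposing deferred acceptance."""
--     r_rank: Dict[str, Dict[str, int]] = {}
--     for r, plist in resident_prefs.items():
--         r_rank[r] = {h: idx for idx, h in enumerate(plist)}
--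
--     # Each hospital tracks how far down its preference list it has proposed.
--     next_proposal: Dict[str, int] = {h: 0 for h in hospital_prefs}
--
--     # Each resident holds at most one offer.
--     resident_held: Dict[str, Optional[str]] = {r: None for r in resident_prefs}
--
--     # Track how many positions each hospital still needs to fill.
--     remaining: Dict[str, int] = dict(quotas)
--
--     # Hospitals that still have unfilled positions and people to propose to.
--     active: deque[str] = deque(
--         h for h in hospital_prefs if remaining[h] > 0
--     )
--
--     while active:
--         hospital = active.popleft()
--         prefs = hospital_prefs[hospital]
--
--         if next_proposal[hospital] >= len(prefs) or remaining[hospital] <= 0: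
--             continue
--
--         resident = prefs[next_proposal[hospital]]
--         next_proposal[hospital] += 1
--
--         if hospital not in r_rank.get(resident, {}):
--             # Resident finds hospital unacceptable.
--             if remaining[hospital] > 0 and next_proposal[hospital] < len(prefs):
--                 active.append(hospital)
--             continue
--
--         current_h = resident_held[resident]
--
--         if current_h is None:
--             resident_held[resident] = hospital
--             remaining[hospital] -= 1
--         elif r_rank[resident][hospital] < r_rank[resident][current_h]:
--             resident_held[resident] = hospital
--             remaining[hospital] -= 1
--             remaining[current_h] += 1
--             if remaining[current_h] > 0 and next_proposal[current_h] < len(hospital_prefs[current_h]):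
--                 active.append(current_h)
--         else:
--             # Rejected.
--             pass
--
--         if remaining[hospital] > 0 and next_proposal[hospital] < len(prefs):
--             active.append(hospital)
--
--     # Build hospital -> residents mapping.
--     h_rank: Dict[str, Dict[str, int]] = {}
--     for h, plist in hospital_prefs.items():
--         h_rank[h] = {r: idx for idx, r in enumerate(plist)}
--
--     held: Dict[str, List[str]] = {h: [] for h in hospital_prefs}
--     for r, h in resident_held.items():
--         if h is not None:
--             held[h].append(r)
--
--     for h in held:
--         held[h].sort(key=lambda r: h_rank[h].get(r, float("inf")))
--
--     return held
-- ===== SOURCE B (Python) =====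
-- def _hospital_proposing_da(resident_prefs, hospital_prefs, quotas):
--     """Gusfield-Irving style deletion-based algorithm: when a resident is
--     (re)assigned, every hospital she likes less is deleted from her 'alive'
--     set, so a later offer that survives the alive test is automatically an
--     improvement and displaces her current hospital unconditionally -- no
--     rank comparison is made at proposal time.  Assignment lists are then
--     read off each hospital's preference list by a single scan."""
--     r_rank = {r: {h: i for i, h in enumerate(ps)} for r, ps in resident_prefs.items()}
--     alive = {r: set(rk) for r, rk in r_rank.items()}
--     holder = {r: None for r in resident_prefs}
--     ptr = {h: 0 for h in hospital_prefs}
--     rem = dict(quotas)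
--     for h0 in hospital_prefs:
--         pending = [h0]
--         while pending:
--             h = pending.pop()
--             plist = hospital_prefs[h]
--             while rem[h] > 0 and ptr[h] < len(plist):
--                 r = plist[ptr[h]]
--                 ptr[h] += 1
--                 if h not in alive.get(r, ()) or holder.get(r) == h:
--                     continue
--                 prev = holder[r]
--                 holder[r] = h
--                 rem[h] -= 1
--                 cut = r_rank[r][h]
--                 alive[r] = {x for x in alive[r] if r_rank[r][x] <= cut}
--                 if prev is not None:
--                     rem[prev] += 1
--                     if rem[prev] == 1 and ptr[prev] < len(hospital_prefs[prev]):
--                         pending.append(prev)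
--     out = {}
--     for h, plist in hospital_prefs.items():
--         hr = {r: i for i, r in enumerate(plist)}
--         out[h] = [r for i, r in enumerate(plist)
--                   if hr[r] == i and holder.get(r) == h]
--     return out
-- ===== Notes on version B (the rewrite author's own statement) =====
-- stated objective: alternative
-- what changed: Replaces deferred acceptance by rank comparison with the Gusfield-Irving deletion-based formulation: each resident keeps a shrinking 'alive' set, an assignment deletes every less-preferred hospital from it, so a later offer that survives the alive test displaces the current hospital unconditionally (no rank comparison at proposal time); the deque round-robin is replaced by a for-loop over hospitals with a local displacement chain, and the final per-hospital rank-sort by a single scan of each hospital's preference list.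
import Mathlib
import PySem

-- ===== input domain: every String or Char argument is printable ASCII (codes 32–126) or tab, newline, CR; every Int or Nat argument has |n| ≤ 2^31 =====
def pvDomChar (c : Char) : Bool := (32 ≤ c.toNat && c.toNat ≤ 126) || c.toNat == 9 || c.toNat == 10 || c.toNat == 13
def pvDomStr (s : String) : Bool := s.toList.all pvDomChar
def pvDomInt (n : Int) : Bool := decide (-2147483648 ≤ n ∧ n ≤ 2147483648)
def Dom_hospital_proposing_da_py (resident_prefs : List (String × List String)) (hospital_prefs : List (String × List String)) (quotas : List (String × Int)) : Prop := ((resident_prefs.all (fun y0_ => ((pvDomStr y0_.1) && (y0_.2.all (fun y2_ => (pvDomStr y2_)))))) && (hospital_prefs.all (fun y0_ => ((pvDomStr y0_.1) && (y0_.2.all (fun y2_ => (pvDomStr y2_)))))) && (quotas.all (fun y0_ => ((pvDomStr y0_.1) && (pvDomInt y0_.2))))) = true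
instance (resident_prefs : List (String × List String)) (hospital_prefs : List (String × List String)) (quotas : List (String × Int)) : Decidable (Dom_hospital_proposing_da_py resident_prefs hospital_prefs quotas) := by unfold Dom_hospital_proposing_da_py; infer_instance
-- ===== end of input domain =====

-- B replaces A's rank-comparison deferred acceptance by the Gusfield-Irving deletion-based
-- formulation: each resident keeps a shrinking 'alive' set, an assignment deletes every
-- less-preferred hospital from it, so an offer surviving the alive test displaces the current
-- hospital unconditionally; the deque round-robin becomes a for-loop with local displacement
-- chains and the final per-hospital rank-sort becomes a single scan of each preference list
-- ("alternative": the result is identical because deferred acceptance is order-independent).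


-- ===== shared helpers (code that is textually identical in both Pythons) =====

-- {x: idx for idx, x in enumerate(plist)}
def daRank (plist : List String) : PySem.Dict String Int :=
  (PySem.List.enumerate plist).foldl (fun d p => d.insert p.2 p.1) PySem.Dict.empty

-- r_rank = {r: {h: i for i, h in enumerate(ps)} for r, ps in resident_prefs.items()}
def daRR (rp : List (String × List String)) : PySem.Dict String (PySem.Dict String Int) :=
  rp.foldl (fun d p => d.insert p.1 (daRank p.2)) PySem.Dict.empty

-- the mutable state shared by both algorithms: proposal pointers, holders, remaining quota
structure DASt where
  np : PySem.Dict String Int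
  held : PySem.Dict String (Option String)
  rem : PySem.Dict String Int
deriving Repr, DecidableEq

-- initial dictionaries (identical comprehensions in both Pythons)
def daInit (rp : List (String × List String)) (hp : List (String × List String)) (q : List (String × Int)) : DASt :=
  ⟨hp.foldl (fun d p => d.insert p.1 (0 : Int)) PySem.Dict.empty,
   rp.foldl (fun d p => d.insert p.1 (none : Option String)) PySem.Dict.empty,
   PySem.Dict.ofList q⟩

-- ===== PORT A =====

-- one proposal by hospital h (the branch structure of A's loop body)
def daStep (hpd : PySem.Dict String (List String)) (rr : PySem.Dict String (PySem.Dict String Int)) (h : String) (s : DASt) : DASt :=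
  let prefs := hpd.getD h []
  let r := PySem.List.pyGetD prefs (s.np.getD h 0) ""
  let np' := s.np.insert h (s.np.getD h 0 + 1)
  if (rr.getD r PySem.Dict.empty).contains h = false then
    ⟨np', s.held, s.rem⟩
  else
    match s.held.getD r none with
    | none => ⟨np', s.held.insert r (some h), s.rem.insert h (s.rem.getD h 0 - 1)⟩
    | some c =>
      if (rr.getD r PySem.Dict.empty).getD h 0 < (rr.getD r PySem.Dict.empty).getD c 0 then
        let rem1 := s.rem.insert h (s.rem.getD h 0 - 1)
        ⟨np', s.held.insert r (some h), rem1.insert c (rem1.getD c 0 + 1)⟩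
      else ⟨np', s.held, s.rem⟩

-- number of proposals still possible (fuel bound for the while loops)
def daMeas (hpd : PySem.Dict String (List String)) (s : DASt) : Nat :=
  (hpd.keys.map (fun h => (hpd.getD h []).length - (s.np.getD h 0).toNat)).sum

-- A's deque loop: one proposal per popped hospital, re-appending as the Python does
def loopA (hpd : PySem.Dict String (List String)) (rr : PySem.Dict String (PySem.Dict String Int)) : Nat → List String → DASt → DASt
  | 0, _, s => s
  | _ + 1, [], s => s
  | fuel + 1, h :: qs, s =>
    let prefs := hpd.getD h []
    if ((prefs.length : Int) ≤ s.np.getD h 0 ∨ s.rem.getD h 0 ≤ 0) then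
      loopA hpd rr fuel qs s
    else
      let r := PySem.List.pyGetD prefs (s.np.getD h 0) ""
      let s' := daStep hpd rr h s
      if (rr.getD r PySem.Dict.empty).contains h = false then
        loopA hpd rr fuel (qs ++ (if 0 < s'.rem.getD h 0 ∧ s'.np.getD h 0 < (prefs.length : Int) then [h] else [])) s'
      else
        let adds₁ :=
          match s.held.getD r none with
          | none => []
          | some c =>
            if (rr.getD r PySem.Dict.empty).getD h 0 < (rr.getD r PySem.Dict.empty).getD c 0 ∧
               0 < s'.rem.getD c 0 ∧ s'.np.getD c 0 < ((hpd.getD c []).length : Int) then [c] else []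
        let adds₂ := if 0 < s'.rem.getD h 0 ∧ s'.np.getD h 0 < (prefs.length : Int) then [h] else []
        loopA hpd rr fuel (qs ++ adds₁ ++ adds₂) s'

def hospital_proposing_da_py (resident_prefs : List (String × List String)) (hospital_prefs : List (String × List String)) (quotas : List (String × Int)) : List (String × List String) :=
  let rr := daRR resident_prefs
  let hpd := PySem.Dict.ofList hospital_prefs
  let s0 := daInit resident_prefs hospital_prefs quotas
  let active := (hospital_prefs.map Prod.fst).filter (fun h => decide (0 < s0.rem.getD h 0))
  let sF := loopA hpd rr (active.length + 2 * daMeas hpd s0 + 1) active s0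
  -- h_rank
  let hrd := hospital_prefs.foldl (fun d p => d.insert p.1 (daRank p.2)) PySem.Dict.empty
  -- held = {h: [] for h in hospital_prefs}; for r, h in resident_held.items(): if h is not None: held[h].append(r)
  let held1 := sF.held.items.foldl
    (fun d pr => match pr.2 with
      | some h => d.modify h [] (fun l => l ++ [pr.1])
      | none => d)
    (hospital_prefs.foldl (fun d p => d.insert p.1 ([] : List String)) PySem.Dict.empty)
  -- for h in held: held[h].sort(key=lambda r: h_rank[h].get(r, float("inf")))
  -- (the int-or-inf Python key is encoded exactly as the lexicographic pair (0, rank) / (1, 0))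
  let sortedD := held1.keys.foldl
    (fun d h => d.modify h []
      (fun lst => PySem.List.sorted2 lst
        (fun r => if (hrd.getD h PySem.Dict.empty).contains r then (0 : Int) else 1)
        (fun r => (hrd.getD h PySem.Dict.empty).getD r 0) false))
    held1
  sortedD.items

-- ===== PORT B =====

-- alive = {r: set(rk) for r, rk in r_rank.items()}
def daAlive0 (rr : PySem.Dict String (PySem.Dict String Int)) : PySem.Dict String (PySem.Set String) :=
  rr.items.foldl (fun d pr => d.insert pr.1 (PySem.Set.ofList pr.2.keys)) PySem.Dict.empty

-- B's inner while: h proposes down its list; an offer surviving the alive test displaces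
-- the current hospital unconditionally and truncates the resident's alive set; a displaced
-- hospital that re-opens is pushed on the local pending chain
def loopBin (hpd : PySem.Dict String (List String)) (rr : PySem.Dict String (PySem.Dict String Int)) :
    Nat → String → List String → DASt → PySem.Dict String (PySem.Set String) →
    List String × DASt × PySem.Dict String (PySem.Set String)
  | 0, _, pending, s, al => (pending, s, al)
  | fuel + 1, h, pending, s, al =>
    if 0 < s.rem.getD h 0 ∧ s.np.getD h 0 < ((hpd.getD h []).length : Int) then
      let r := PySem.List.pyGetD (hpd.getD h []) (s.np.getD h 0) ""
      let np' := s.np.insert h (s.np.getD h 0 + 1)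
      if h ∈ al.getD r [] ∧ s.held.getD r none ≠ some h then
        let cut := (rr.getD r PySem.Dict.empty).getD h 0
        let al' := al.insert r ((al.getD r []).filter (fun x => decide ((rr.getD r PySem.Dict.empty).getD x 0 ≤ cut)))
        match s.held.getD r none with
        | none =>
          let s' : DASt := ⟨np', s.held.insert r (some h), s.rem.insert h (s.rem.getD h 0 - 1)⟩
          loopBin hpd rr fuel h pending s' al'
        | some c =>
          let rem1 := s.rem.insert h (s.rem.getD h 0 - 1)
          let s' : DASt := ⟨np', s.held.insert r (some h), rem1.insert c (rem1.getD c 0 + 1)⟩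
          let pending' := if s'.rem.getD c 0 = 1 ∧ s'.np.getD c 0 < ((hpd.getD c []).length : Int) then pending ++ [c] else pending
          loopBin hpd rr fuel h pending' s' al'
      else
        loopBin hpd rr fuel h pending ⟨np', s.held, s.rem⟩ al
    else (pending, s, al)

-- B's chain loop: pop a pending hospital from the end and let it propose until done
def loopBpend (hpd : PySem.Dict String (List String)) (rr : PySem.Dict String (PySem.Dict String Int)) :
    Nat → List String → DASt → PySem.Dict String (PySem.Set String) →
    DASt × PySem.Dict String (PySem.Set String)
  | 0, _, s, al => (s, al)
  | fuel + 1, pending, s, al =>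
    match pending.getLast? with
    | none => (s, al)
    | some h =>
      let t := loopBin hpd rr (daMeas hpd s + 1) h pending.dropLast s al
      loopBpend hpd rr fuel t.1 t.2.1 t.2.2

def hospital_proposing_da_py_alt (resident_prefs : List (String × List String)) (hospital_prefs : List (String × List String)) (quotas : List (String × Int)) : List (String × List String) :=
  let rr := daRR resident_prefs
  let hpd := PySem.Dict.ofList hospital_prefs
  let s0 := daInit resident_prefs hospital_prefs quotas
  let al0 := daAlive0 rr
  -- for h0 in hospital_prefs: pending = [h0]; while pending: ...
  let sF := (hospital_prefs.map Prod.fst).foldl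
    (fun (st : DASt × PySem.Dict String (PySem.Set String)) h0 =>
      loopBpend hpd rr (daMeas hpd st.1 + 2) [h0] st.1 st.2)
    (s0, al0)
  -- out[h] = [r for i, r in enumerate(plist) if hr[r] == i and holder.get(r) == h]
  hospital_prefs.foldl
    (fun out p =>
      let hr := daRank p.2
      out ++ [(p.1, (PySem.List.enumerate p.2 0).foldl
        (fun acc e => if hr.getD e.2 0 = e.1 ∧ sF.1.held.getD e.2 none = some p.1 then acc ++ [e.2] else acc) [])])
    []

-- ===== PRECONDITION & SPEC =====
-- Pre_ excludes only (i) association lists with duplicate keys, which do not represent any Python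
-- dict input, and (ii) inputs where some hospital lacks a quota entry, on which A raises KeyError.
def Pre_hospital_proposing_da_py (resident_prefs : List (String × List String)) (hospital_prefs : List (String × List String)) (quotas : List (String × Int)) : Prop :=
  (resident_prefs.map Prod.fst).Nodup ∧ (hospital_prefs.map Prod.fst).Nodup ∧
  (quotas.map Prod.fst).Nodup ∧ ∀ p ∈ hospital_prefs, p.1 ∈ quotas.map Prod.fst
instance (resident_prefs : List (String × List String)) (hospital_prefs : List (String × List String)) (quotas : List (String × Int)) : Decidable (Pre_hospital_proposing_da_py resident_prefs hospital_prefs quotas) := by unfold Pre_hospital_proposing_da_py; infer_instance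

def pvWitness_hospital_proposing_da_py : (List (String × List String)) × (List (String × List String)) × (List (String × Int)) :=
  ([("r0", ["h0", "h1"]), ("r1", ["h0"])], [("h0", ["r0", "r1"]), ("h1", ["r0"])], [("h0", (1 : Int)), ("h1", (1 : Int))])

def Spec_hospital_proposing_da_py (resident_prefs : List (String × List String)) (hospital_prefs : List (String × List String)) (quotas : List (String × Int)) (out : List (String × List String)) : Prop := out = hospital_proposing_da_py_alt resident_prefs hospital_prefs quotas
instance (resident_prefs : List (String × List String)) (hospital_prefs : List (String × List String)) (quotas : List (String × Int)) (out : List (String × List String)) : Decidable (Spec_hospital_proposing_da_py resident_prefs hospital_prefs quotas out) := by unfold Spec_hospital_proposing_da_py; infer_instance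

-- ===== CLAIM (what is proved, stated in full; the proofs are below) =====
def Claim_equal_hospital_proposing_da_py : Prop := ∀ (resident_prefs : List (String × List String)) (hospital_prefs : List (String × List String)) (quotas : List (String × Int)), Dom_hospital_proposing_da_py resident_prefs hospital_prefs quotas → Pre_hospital_proposing_da_py resident_prefs hospital_prefs quotas → Spec_hospital_proposing_da_py resident_prefs hospital_prefs quotas (hospital_proposing_da_py resident_prefs hospital_prefs quotas)

-- ===== LEMMAS AND PROOFS =====

-- enabled hospitals
def daEb (hpd : PySem.Dict String (List String)) (s : DASt) (h : String) : Bool :=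
  decide (0 < s.rem.getD h 0) && decide (0 ≤ s.np.getD h 0) && decide (s.np.getD h 0 < ((hpd.getD h []).length : Int))

def daE (hpd : PySem.Dict String (List String)) (s : DASt) (h : String) : Prop := daEb hpd s h = true

-- canonical chaotic-iteration normal form: always step the first enabled hospital
def daFirstE (hpd : PySem.Dict String (List String)) (s : DASt) : Option String :=
  hpd.keys.find? (fun h => daEb hpd s h)

def daNf (hpd : PySem.Dict String (List String)) (rr : PySem.Dict String (PySem.Dict String Int)) : Nat → DASt → DASt
  | 0, s => s
  | fuel + 1, s =>
    match daFirstE hpd s with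
    | none => s
    | some h => daNf hpd rr fuel (daStep hpd rr h s)

def daNFP (hpd : PySem.Dict String (List String)) (rr : PySem.Dict String (PySem.Dict String Int)) (s : DASt) : DASt :=
  daNf hpd rr (daMeas hpd s) s

-- rank dictionaries have pairwise-distinct values on their keys
def RankInj (d : PySem.Dict String Int) : Prop :=
  ∀ a b, d.contains a = true → d.contains b = true → d.getD a 0 = d.getD b 0 → a = b

-- state invariant maintained by the proposing loops
def daInv (hpd : PySem.Dict String (List String)) (rr : PySem.Dict String (PySem.Dict String Int)) (s : DASt) : Prop :=
  s.np.keys.Nodup ∧ s.held.keys.Nodup ∧ s.rem.keys.Nodup ∧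
  (∀ h ∈ hpd.keys, s.np.contains h = true) ∧
  (∀ h ∈ hpd.keys, s.rem.contains h = true) ∧
  (∀ r, rr.contains r = true → s.held.contains r = true) ∧
  (∀ h, 0 ≤ s.np.getD h 0) ∧
  (∀ r c, s.held.getD r none = some c →
      c ∈ hpd.keys ∧ 0 ≤ s.rem.getD c 0 ∧ r ∈ hpd.getD c [] ∧ (rr.getD r PySem.Dict.empty).contains c = true)

-- B's alive-set invariant: alive[r] is exactly the acceptable hospitals not ranked below r's holder
def AliveInv (rr : PySem.Dict String (PySem.Dict String Int)) (al : PySem.Dict String (PySem.Set String)) (held : PySem.Dict String (Option String)) : Prop :=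
  ∀ r x, x ∈ al.getD r ([] : PySem.Set String) ↔
    ((rr.getD r PySem.Dict.empty).contains x = true ∧
     ∀ c, held.getD r none = some c →
       (rr.getD r PySem.Dict.empty).getD x 0 ≤ (rr.getD r PySem.Dict.empty).getD c 0)

-- ---------- dictionary utilities ----------

theorem dict_insert_comm {ν : Type} (d : PySem.Dict String ν) (k k' : String) (v v' : ν)
    (hne : k ≠ k') (hk : d.contains k = true) (hk' : d.contains k' = true) :
    (d.insert k v).insert k' v' = (d.insert k' v').insert k v := by
  have h1 : (d.insert k v).contains k' = true := by
    rw [PySem.Dict.contains_insert]; simp [hk']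
  have h2 : (d.insert k' v').contains k = true := by
    rw [PySem.Dict.contains_insert]; simp [hk]
  apply PySem.Dict.ext
  rw [PySem.Dict.items_insert_of_contains _ _ h1, PySem.Dict.items_insert_of_contains _ _ hk,
     PySem.Dict.items_insert_of_contains _ _ h2, PySem.Dict.items_insert_of_contains _ _ hk']
  rw [List.map_map, List.map_map]
  apply List.map_congr_left
  intro p _
  by_cases hp : p.1 = k <;> by_cases hq : p.1 = k'
  · exact absurd (hp ▸ hq) hne
  all_goals simp [Function.comp, hp, hq, hne, Ne.symm hne]

theorem dict_insert_getD_self (d : PySem.Dict String Int) (k : String)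
    (hk : d.contains k = true) (hnd : d.keys.Nodup) : d.insert k (d.getD k 0) = d := by
  apply PySem.Dict.ext
  rw [PySem.Dict.items_insert_of_contains _ _ hk]
  conv_rhs => rw [← List.map_id d.items]
  apply List.map_congr_left
  intro p hp
  obtain ⟨p1, p2⟩ := p
  by_cases hpk : p1 = k
  · subst hpk
    have hget : d.get? p1 = some p2 := by
      rw [PySem.Dict.get?_eq_some_iff_mem_items _ _ _ hnd]
      exact hp
    have hv : d.getD p1 0 = p2 := by
      rw [PySem.Dict.getD_eq_get?_getD, hget]; rfl
    simp [hv]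
  · simp [hpk]

-- rem/np updates are "bumps": insert k (getD k + δ)
def dbump (d : PySem.Dict String Int) (k : String) (δ : Int) : PySem.Dict String Int :=
  d.insert k (d.getD k 0 + δ)

theorem getD_dbump (d : PySem.Dict String Int) (k k' : String) (δ : Int) :
    (dbump d k δ).getD k' 0 = if k' = k then d.getD k 0 + δ else d.getD k' 0 := by
  simp [dbump, PySem.Dict.getD_insert]

theorem contains_dbump (d : PySem.Dict String Int) (k k' : String) (δ : Int) :
    (dbump d k δ).contains k' = (k' == k || d.contains k') := by
  simp [dbump, PySem.Dict.contains_insert]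

theorem nodup_keys_dbump (d : PySem.Dict String Int) (k : String) (δ : Int)
    (h : d.keys.Nodup) : (dbump d k δ).keys.Nodup := by
  simpa [dbump] using PySem.Dict.nodup_keys_insert d k _ h

theorem dbump_dbump_self (d : PySem.Dict String Int) (k : String) (a b : Int) :
    dbump (dbump d k a) k b = d.insert k (d.getD k 0 + a + b) := by
  unfold dbump
  rw [PySem.Dict.insert_insert_self]
  congr 1
  rw [PySem.Dict.getD_insert_self]

theorem dbump_comm (d : PySem.Dict String Int) (k k' : String) (a b : Int)
    (hk : d.contains k = true) (hk' : d.contains k' = true) :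
    dbump (dbump d k a) k' b = dbump (dbump d k' b) k a := by
  by_cases hne : k = k'
  · subst hne
    rw [dbump_dbump_self, dbump_dbump_self]
    congr 1; omega
  · have e1 : dbump (dbump d k a) k' b = (d.insert k (d.getD k 0 + a)).insert k' (d.getD k' 0 + b) := by
      unfold dbump
      congr 2
      rw [PySem.Dict.getD_insert]
      simp [Ne.symm hne]
    have e2 : dbump (dbump d k' b) k a = (d.insert k' (d.getD k' 0 + b)).insert k (d.getD k 0 + a) := by
      unfold dbump
      congr 2
      rw [PySem.Dict.getD_insert]
      simp [hne]
    rw [e1, e2, dict_insert_comm d k k' _ _ hne hk hk']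

-- value-property preservation through an insert loop
theorem getD_foldl_insert_prop {α ν : Type} (P : ν → Prop) (key : α → String) (val : α → ν) (dflt : ν) :
    ∀ (l : List α) (d : PySem.Dict String ν), (∀ k, P (d.getD k dflt)) → (∀ a ∈ l, P (val a)) →
      ∀ k, P ((l.foldl (fun d a => d.insert (key a) (val a)) d).getD k dflt)
  | [], d, hd, _, k => hd k
  | a :: t, d, hd, hl, k => by
    refine getD_foldl_insert_prop P key val dflt t (d.insert (key a) (val a)) ?_ (fun x hx => hl x (by simp [hx])) k
    intro k'
    rw [PySem.Dict.getD_insert]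
    split
    · exact hl a (by simp)
    · exact hd k'

-- a per-key sort loop over distinct keys rewrites each value once
theorem getD_foldl_modify_once (f : String → List String → List String) :
    ∀ (ks : List String) (d : PySem.Dict String (List String)), ks.Nodup →
      ∀ k, (ks.foldl (fun d h => d.modify h [] (f h)) d).getD k [] =
        if k ∈ ks then f k (d.getD k []) else d.getD k []
  | [], d, _, k => by simp
  | h :: t, d, hnd, k => by
    have hnd' := hnd
    rw [List.nodup_cons] at hnd'
    rw [List.foldl_cons, getD_foldl_modify_once f t _ hnd'.2 k]
    unfold PySem.Dict.modify
    rw [PySem.Dict.getD_insert]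
    by_cases hk : k = h
    · subst hk
      simp [hnd'.1]
    · simp [hk]

-- ---------- enumerate and rank-dictionary facts ----------

theorem enumerate_cons (x : String) (t : List String) (s : Int) :
    PySem.List.enumerate (x :: t) s = (s, x) :: PySem.List.enumerate t (s + 1) := rfl

theorem enumerate_append_singleton : ∀ (l : List String) (x : String) (s : Int),
    PySem.List.enumerate (l ++ [x]) s = PySem.List.enumerate l s ++ [(s + l.length, x)]
  | [], x, s => by simp [PySem.List.enumerate]
  | y :: t, x, s => by
    rw [List.cons_append, enumerate_cons, enumerate_append_singleton t x (s + 1), enumerate_cons]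
    simp
    omega

theorem mem_enumerate : ∀ (l : List String) (s : Int) (e : Int × String),
    e ∈ PySem.List.enumerate l s → s ≤ e.1 ∧ e.2 ∈ l ∧ ∃ j : Nat, e.1 = s + j ∧ l[j]? = some e.2
  | [], _, _, h => by simp [PySem.List.enumerate] at h
  | x :: t, s, e, h => by
    rw [enumerate_cons] at h
    rcases List.mem_cons.mp h with h | h
    · subst h
      exact ⟨le_refl _, by simp, 0, by simp⟩
    · obtain ⟨h1, h2, j, hj1, hj2⟩ := mem_enumerate t (s + 1) e h
      exact ⟨by omega, by simp [h2], j + 1, by omega, by simpa using hj2⟩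

theorem pairwise_enumerate : ∀ (l : List String) (s : Int),
    (PySem.List.enumerate l s).Pairwise (fun a b => a.1 < b.1)
  | [], _ => by simp [PySem.List.enumerate]
  | x :: t, s => by
    rw [enumerate_cons]
    refine List.pairwise_cons.mpr ⟨?_, pairwise_enumerate t (s + 1)⟩
    intro e he
    have := (mem_enumerate t (s + 1) e he).1
    omega

theorem daRank_append (l : List String) (x : String) :
    daRank (l ++ [x]) = (daRank l).insert x l.length := by
  unfold daRank
  rw [enumerate_append_singleton l x 0, List.foldl_append]
  simp

theorem daRank_contains : ∀ (l : List String) (r : String), (daRank l).contains r = true ↔ r ∈ l := by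
  intro l
  induction l using List.reverseRecOn with
  | nil => intro r; simp [daRank, PySem.List.enumerate, PySem.Dict.contains_empty]
  | append_singleton ys x ih =>
    intro r
    rw [daRank_append, PySem.Dict.contains_insert]
    by_cases hr : r = x <;> simp [hr, ih]

theorem daRank_getD_mem : ∀ (l : List String), ∀ r ∈ l,
    ∃ i : Nat, ((i : Int), r) ∈ PySem.List.enumerate l 0 ∧ (daRank l).getD r 0 = i := by
  intro l
  induction l using List.reverseRecOn with
  | nil => intro r hr; simp at hr
  | append_singleton ys x ih =>
    intro r hr
    rw [daRank_append]
    by_cases hrx : r = x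
    · subst hrx
      refine ⟨ys.length, ?_, by rw [PySem.Dict.getD_insert_self]⟩
      rw [enumerate_append_singleton]
      simp
    · have hrys : r ∈ ys := by
        rcases List.mem_append.mp hr with h | h
        · exact h
        · exact absurd (List.mem_singleton.mp h) hrx
      obtain ⟨i, hmem, hval⟩ := ih r hrys
      refine ⟨i, ?_, ?_⟩
      · rw [enumerate_append_singleton]; exact List.mem_append_left _ hmem
      · rw [PySem.Dict.getD_insert_of_ne _ _ _ hrx, hval]

theorem enumerate_first_inj (l : List String) (s : Int) (e e' : Int × String)
    (he : e ∈ PySem.List.enumerate l s) (he' : e' ∈ PySem.List.enumerate l s) (h1 : e.1 = e'.1) : e = e' := by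
  obtain ⟨_, _, j, hj1, hj2⟩ := mem_enumerate l s e he
  obtain ⟨_, _, j', hj1', hj2'⟩ := mem_enumerate l s e' he'
  have : j = j' := by omega
  subst this
  have : e.2 = e'.2 := Option.some_injective _ (hj2.symm.trans hj2')
  exact Prod.ext h1 this

theorem daRank_inj (l : List String) : RankInj (daRank l) := by
  intro a b ha hb hab
  obtain ⟨i, hai, hav⟩ := daRank_getD_mem l a ((daRank_contains l a).mp ha)
  obtain ⟨j, hbj, hbv⟩ := daRank_getD_mem l b ((daRank_contains l b).mp hb)
  have hij : (i : Int) = j := by rw [← hav, ← hbv, hab]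
  have := enumerate_first_inj l 0 (i, a) (j, b) hai hbj (by simpa using hij)
  simpa using congrArg Prod.snd this

theorem rankInj_empty : RankInj PySem.Dict.empty := by
  intro a b ha _ _
  simp [PySem.Dict.contains_empty] at ha

theorem daRR_inj (rp : List (String × List String)) (r : String) :
    RankInj ((daRR rp).getD r PySem.Dict.empty) := by
  unfold daRR
  exact getD_foldl_insert_prop RankInj Prod.fst (fun p => daRank p.2) PySem.Dict.empty rp
    PySem.Dict.empty (fun k => by rw [PySem.Dict.getD_empty]; exact rankInj_empty)
    (fun p _ => daRank_inj p.2) r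

-- ---------- characterization of one proposal step ----------

-- the resident hospital h proposes to next
def daTgt (hpd : PySem.Dict String (List String)) (h : String) (s : DASt) : String :=
  PySem.List.pyGetD (hpd.getD h []) (s.np.getD h 0) ""

-- outcome of h's proposal: none = no change of held/rem, some none = fresh accept,
-- some (some c) = displaces current holder c
def daOut (hpd : PySem.Dict String (List String)) (rr : PySem.Dict String (PySem.Dict String Int)) (h : String) (s : DASt) : Option (Option String) :=
  if (rr.getD (daTgt hpd h s) PySem.Dict.empty).contains h = false then none
  else
    match s.held.getD (daTgt hpd h s) none with
    | none => some none
    | some c =>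
      if (rr.getD (daTgt hpd h s) PySem.Dict.empty).getD h 0 < (rr.getD (daTgt hpd h s) PySem.Dict.empty).getD c 0 then some (some c)
      else none

theorem daStep_eq (hpd : PySem.Dict String (List String)) (rr : PySem.Dict String (PySem.Dict String Int)) (h : String) (s : DASt) :
    daStep hpd rr h s =
      match daOut hpd rr h s with
      | none => ⟨dbump s.np h 1, s.held, s.rem⟩
      | some none => ⟨dbump s.np h 1, s.held.insert (daTgt hpd h s) (some h), dbump s.rem h (-1)⟩
      | some (some c) => ⟨dbump s.np h 1, s.held.insert (daTgt hpd h s) (some h),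
          dbump (dbump s.rem h (-1)) c 1⟩ := by
  unfold daStep daOut daTgt dbump
  dsimp only
  split
  · rfl
  · split
    · simp [sub_eq_add_neg]
    · split
      · simp [sub_eq_add_neg]
      · rfl

theorem daE_iff (hpd : PySem.Dict String (List String)) (s : DASt) (h : String) :
    daE hpd s h ↔ 0 < s.rem.getD h 0 ∧ 0 ≤ s.np.getD h 0 ∧ s.np.getD h 0 < ((hpd.getD h []).length : Int) := by
  unfold daE daEb
  simp only [Bool.and_eq_true, decide_eq_true_eq]
  omega

theorem daE_mem_keys (hpd : PySem.Dict String (List String)) (s : DASt) (h : String)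
    (hE : daE hpd s h) : h ∈ hpd.keys := by
  rw [daE_iff] at hE
  by_contra hmem
  have hc : hpd.contains h = false := by
    by_contra hc'
    exact hmem ((PySem.Dict.contains_iff_mem_keys _ _).mp (by revert hc'; cases hpd.contains h <;> simp))
  rw [PySem.Dict.getD_of_not_contains _ _ hc] at hE
  simp at hE
  omega

theorem daStep_np (hpd : PySem.Dict String (List String)) (rr : PySem.Dict String (PySem.Dict String Int)) (h : String) (s : DASt) :
    (daStep hpd rr h s).np = dbump s.np h 1 := by
  rw [daStep_eq]
  rcases daOut hpd rr h s with _ | (_ | c) <;> rfl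

theorem daTgt_step_ne (hpd : PySem.Dict String (List String)) (rr : PySem.Dict String (PySem.Dict String Int)) (h h' : String) (s : DASt)
    (hne : h' ≠ h) : daTgt hpd h' (daStep hpd rr h s) = daTgt hpd h' s := by
  unfold daTgt
  rw [daStep_np, getD_dbump]
  simp [hne]

theorem daStep_np_getD_ne (hpd : PySem.Dict String (List String)) (rr : PySem.Dict String (PySem.Dict String Int)) (h h' : String) (s : DASt)
    (hne : h' ≠ h) : (daStep hpd rr h s).np.getD h' 0 = s.np.getD h' 0 := by
  rw [daStep_np, getD_dbump]
  simp [hne]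

theorem daStep_held_getD (hpd : PySem.Dict String (List String)) (rr : PySem.Dict String (PySem.Dict String Int)) (h : String) (s : DASt) (x : String) :
    (daStep hpd rr h s).held.getD x none =
      if daOut hpd rr h s ≠ none ∧ x = daTgt hpd h s then some h else s.held.getD x none := by
  rw [daStep_eq]
  rcases daOut hpd rr h s with _ | (_ | c) <;> dsimp only
  · simp
  all_goals
    by_cases hx : x = daTgt hpd h s
    · subst hx; rw [PySem.Dict.getD_insert_self]; simp
    · rw [PySem.Dict.getD_insert_of_ne _ _ _ hx]; simp [hx]

theorem daStep_rem_pos (hpd : PySem.Dict String (List String)) (rr : PySem.Dict String (PySem.Dict String Int)) (h h' : String) (s : DASt)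
    (hne : h' ≠ h) (hpos : 0 < s.rem.getD h' 0) : 0 < (daStep hpd rr h s).rem.getD h' 0 := by
  rw [daStep_eq]
  rcases daOut hpd rr h s with _ | (_ | c) <;> dsimp only
  · exact hpos
  · rw [getD_dbump, if_neg hne]; omega
  · by_cases hc : h' = c
    · subst hc
      rw [getD_dbump, if_pos rfl, getD_dbump, if_neg hne]
      omega
    · rw [getD_dbump, if_neg hc, getD_dbump, if_neg hne]
      exact hpos

theorem daE_mono (hpd : PySem.Dict String (List String)) (rr : PySem.Dict String (PySem.Dict String Int)) (h h' : String) (s : DASt)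
    (hne : h' ≠ h) (hE : daE hpd s h') : daE hpd (daStep hpd rr h s) h' := by
  rw [daE_iff] at hE ⊢
  refine ⟨daStep_rem_pos hpd rr h h' s hne hE.1, ?_, ?_⟩ <;>
    rw [daStep_np_getD_ne hpd rr h h' s hne]
  · exact hE.2.1
  · exact hE.2.2

-- ---------- the measure ----------

theorem daMeas_pos (hpd : PySem.Dict String (List String)) (s : DASt) (h : String)
    (hE : daE hpd s h) : 0 < daMeas hpd s := by
  have hmem := daE_mem_keys hpd s h hE
  rw [daE_iff] at hE
  have hterm : 1 ≤ (hpd.getD h []).length - (s.np.getD h 0).toNat := by omega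
  have : (hpd.getD h []).length - (s.np.getD h 0).toNat ≤ daMeas hpd s := by
    unfold daMeas
    exact List.single_le_sum (fun x _ => Nat.zero_le x) _ (List.mem_map_of_mem hmem)
  omega

theorem daMeas_step_lt (hpd : PySem.Dict String (List String)) (rr : PySem.Dict String (PySem.Dict String Int)) (h : String) (s : DASt)
    (hE : daE hpd s h) : daMeas hpd (daStep hpd rr h s) < daMeas hpd s := by
  have hmem := daE_mem_keys hpd s h hE
  rw [daE_iff] at hE
  unfold daMeas
  apply List.sum_lt_sum
  · intro k _
    rw [daStep_np, getD_dbump]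
    by_cases hk : k = h
    · simp [hk]; omega
    · simp [hk]
  · refine ⟨h, hmem, ?_⟩
    rw [daStep_np, getD_dbump]
    simp
    omega

-- ---------- invariant preservation ----------

theorem rr_contains_of_rank_contains (rr : PySem.Dict String (PySem.Dict String Int)) (r h : String)
    (hc : (rr.getD r PySem.Dict.empty).contains h = true) : rr.contains r = true := by
  by_contra hrc
  have : rr.contains r = false := by revert hrc; cases rr.contains r <;> simp
  rw [PySem.Dict.getD_of_not_contains _ _ this, PySem.Dict.contains_empty] at hc
  exact Bool.false_ne_true hc

theorem daTgt_mem (hpd : PySem.Dict String (List String)) (s : DASt) (h : String)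
    (hE : daE hpd s h) : daTgt hpd h s ∈ hpd.getD h [] := by
  rw [daE_iff] at hE
  unfold daTgt
  exact PySem.List.pyGetD_mem _ _ ⟨by omega, hE.2.2⟩

theorem daInv_step (hpd : PySem.Dict String (List String)) (rr : PySem.Dict String (PySem.Dict String Int)) (h : String) (s : DASt)
    (hInv : daInv hpd rr s) (hE : daE hpd s h) : daInv hpd rr (daStep hpd rr h s) := by
  obtain ⟨hnp, hheld, hrem, hnpc, hremc, hrrheld, hnp0, hhold⟩ := hInv
  have hEi := (daE_iff hpd s h).mp hE
  have hmem := daE_mem_keys hpd s h hE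
  have hrtgt := daTgt_mem hpd s h hE
  rw [daStep_eq]
  rcases hout : daOut hpd rr h s with _ | (_ | c) <;> dsimp only
  · exact ⟨nodup_keys_dbump _ _ _ hnp, hheld, hrem,
      fun k hk => by rw [contains_dbump]; simp [hnpc k hk],
      hremc, hrrheld,
      fun k => by rw [getD_dbump]; split <;> [omega; exact hnp0 k], hhold⟩
  all_goals
    unfold daOut at hout
    rw [daE_iff] at hE
  -- fresh accept
  · split at hout
    · exact absurd hout (by simp)
    case isFalse hacc =>
      have hacc' : (rr.getD (daTgt hpd h s) PySem.Dict.empty).contains h = true := by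
        revert hacc; cases (rr.getD (daTgt hpd h s) PySem.Dict.empty).contains h <;> simp
      refine ⟨nodup_keys_dbump _ _ _ hnp, PySem.Dict.nodup_keys_insert _ _ _ hheld,
        nodup_keys_dbump _ _ _ hrem,
        fun k hk => by rw [contains_dbump]; simp [hnpc k hk],
        fun k hk => by rw [contains_dbump]; simp [hremc k hk],
        fun k hk => by rw [PySem.Dict.contains_insert]; simp [hrrheld k hk],
        fun k => by rw [getD_dbump]; split <;> [omega; exact hnp0 k],
        ?_⟩
      intro x cx hx
      by_cases hxr : x = daTgt hpd h s
      · subst hxr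
        rw [PySem.Dict.getD_insert_self] at hx
        obtain rfl : h = cx := by simpa using hx
        refine ⟨hmem, ?_, hrtgt, hacc'⟩
        rw [getD_dbump, if_pos rfl]
        omega
      · rw [PySem.Dict.getD_insert_of_ne _ _ _ hxr] at hx
        obtain ⟨hc1, hc2, hc3, hc4⟩ := hhold x cx hx
        refine ⟨hc1, ?_, hc3, hc4⟩
        rw [getD_dbump]
        split <;> omega
  -- displacement
  · split at hout
    · exact absurd hout (by simp)
    case isFalse hacc =>
      have hacc' : (rr.getD (daTgt hpd h s) PySem.Dict.empty).contains h = true := by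
        revert hacc; cases (rr.getD (daTgt hpd h s) PySem.Dict.empty).contains h <;> simp
      refine ⟨nodup_keys_dbump _ _ _ hnp, PySem.Dict.nodup_keys_insert _ _ _ hheld,
        nodup_keys_dbump _ _ _ (nodup_keys_dbump _ _ _ hrem),
        fun k hk => by rw [contains_dbump]; simp [hnpc k hk],
        fun k hk => by rw [contains_dbump, contains_dbump]; simp [hremc k hk],
        fun k hk => by rw [PySem.Dict.contains_insert]; simp [hrrheld k hk],
        fun k => by rw [getD_dbump]; split <;> [omega; exact hnp0 k],
        ?_⟩
      intro x cx hx
      by_cases hxr : x = daTgt hpd h s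
      · subst hxr
        rw [PySem.Dict.getD_insert_self] at hx
        obtain rfl : h = cx := by simpa using hx
        refine ⟨hmem, ?_, hrtgt, hacc'⟩
        by_cases hhc : h = c
        · rw [getD_dbump, if_pos hhc, getD_dbump, if_pos hhc.symm]
          omega
        · rw [getD_dbump, if_neg hhc, getD_dbump, if_pos rfl]
          omega
      · rw [PySem.Dict.getD_insert_of_ne _ _ _ hxr] at hx
        obtain ⟨hc1, hc2, hc3, hc4⟩ := hhold x cx hx
        refine ⟨hc1, ?_, hc3, hc4⟩
        by_cases h1 : cx = c
        · subst h1
          rw [getD_dbump, if_pos rfl, getD_dbump]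
          split <;> omega
        · rw [getD_dbump, if_neg h1, getD_dbump]
          split <;> omega

-- ---------- commuting dbump chains ----------

theorem contains_dbump_of (d : PySem.Dict String Int) (k x : String) (δ : Int)
    (h : d.contains x = true) : (dbump d k δ).contains x = true := by
  rw [contains_dbump]; simp [h]

theorem dbump3a (d : PySem.Dict String Int) (k1 k2 k3 : String) (a1 a2 a3 : Int)
    (c1 : d.contains k1 = true) (c2 : d.contains k2 = true) (c3 : d.contains k3 = true) :
    dbump (dbump (dbump d k1 a1) k2 a2) k3 a3 = dbump (dbump (dbump d k2 a2) k3 a3) k1 a1 := by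
  rw [dbump_comm d k1 k2 a1 a2 c1 c2,
     dbump_comm (dbump d k2 a2) k1 k3 a1 a3 (contains_dbump_of _ _ _ _ c1) (contains_dbump_of _ _ _ _ c3)]

theorem dbump3b (d : PySem.Dict String Int) (k1 k2 k3 : String) (a1 a2 a3 : Int)
    (c1 : d.contains k1 = true) (c2 : d.contains k2 = true) (c3 : d.contains k3 = true) :
    dbump (dbump (dbump d k1 a1) k2 a2) k3 a3 = dbump (dbump (dbump d k3 a3) k1 a1) k2 a2 := by
  rw [dbump_comm (dbump d k1 a1) k2 k3 a2 a3 (contains_dbump_of _ _ _ _ c2) (contains_dbump_of _ _ _ _ c3),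
     dbump_comm d k1 k3 a1 a3 c1 c3]

theorem dbump4 (d : PySem.Dict String Int) (k1 k2 k3 k4 : String) (a1 a2 a3 a4 : Int)
    (c1 : d.contains k1 = true) (c2 : d.contains k2 = true)
    (c3 : d.contains k3 = true) (c4 : d.contains k4 = true) :
    dbump (dbump (dbump (dbump d k1 a1) k2 a2) k3 a3) k4 a4 =
    dbump (dbump (dbump (dbump d k3 a3) k4 a4) k1 a1) k2 a2 := by
  rw [dbump_comm (dbump d k1 a1) k2 k3 a2 a3 (contains_dbump_of _ _ _ _ c2) (contains_dbump_of _ _ _ _ c3),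
     dbump_comm d k1 k3 a1 a3 c1 c3,
     dbump_comm (dbump (dbump d k3 a3) k1 a1) k2 k4 a2 a4
       (contains_dbump_of _ _ _ _ (contains_dbump_of _ _ _ _ c2))
       (contains_dbump_of _ _ _ _ (contains_dbump_of _ _ _ _ c4)),
     dbump_comm (dbump d k3 a3) k1 k4 a1 a4
       (contains_dbump_of _ _ _ _ c1) (contains_dbump_of _ _ _ _ c4)]

theorem dbump_cancel' (d : PySem.Dict String Int) (k : String) (a b : Int)
    (hab : a + b = 0) (hk : d.contains k = true) (hnd : d.keys.Nodup) :
    dbump (dbump d k a) k b = d := by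
  rw [dbump_dbump_self]
  have : d.getD k 0 + a + b = d.getD k 0 := by omega
  rw [this, dict_insert_getD_self d k hk hnd]

-- ---------- step decomposition into independent effects ----------

def maybeIns (d : PySem.Dict String (Option String)) (o : Option (Option String)) (k : String) (v : Option String) : PySem.Dict String (Option String) :=
  match o with
  | none => d
  | some _ => d.insert k v

def remEff (d : PySem.Dict String Int) (o : Option (Option String)) (h : String) : PySem.Dict String Int :=
  match o with
  | none => d
  | some none => dbump d h (-1)
  | some (some c) => dbump (dbump d h (-1)) c 1

theorem maybeIns_none (d : PySem.Dict String (Option String)) (k : String) (v : Option String) : maybeIns d none k v = d := rfl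
theorem maybeIns_some (d : PySem.Dict String (Option String)) (w : Option String) (k : String) (v : Option String) : maybeIns d (some w) k v = d.insert k v := rfl
theorem remEff_none (d : PySem.Dict String Int) (h : String) : remEff d none h = d := rfl
theorem remEff_some_none (d : PySem.Dict String Int) (h : String) : remEff d (some none) h = dbump d h (-1) := rfl
theorem remEff_some_some (d : PySem.Dict String Int) (h c : String) : remEff d (some (some c)) h = dbump (dbump d h (-1)) c 1 := rfl

theorem daOut_of_not_acc (hpd : PySem.Dict String (List String)) (rr : PySem.Dict String (PySem.Dict String Int)) (h : String) (s : DASt)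
    (hacc : (rr.getD (daTgt hpd h s) PySem.Dict.empty).contains h = false) : daOut hpd rr h s = none := by
  unfold daOut
  rw [if_pos hacc]

theorem daOut_of_acc_none (hpd : PySem.Dict String (List String)) (rr : PySem.Dict String (PySem.Dict String Int)) (h : String) (s : DASt)
    (hacc : (rr.getD (daTgt hpd h s) PySem.Dict.empty).contains h = true)
    (hh : s.held.getD (daTgt hpd h s) none = none) : daOut hpd rr h s = some none := by
  unfold daOut
  rw [if_neg (by simp [hacc]), hh]

theorem daOut_of_acc_some (hpd : PySem.Dict String (List String)) (rr : PySem.Dict String (PySem.Dict String Int)) (h : String) (s : DASt) (c : String)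
    (hacc : (rr.getD (daTgt hpd h s) PySem.Dict.empty).contains h = true)
    (hh : s.held.getD (daTgt hpd h s) none = some c) :
    daOut hpd rr h s =
      if (rr.getD (daTgt hpd h s) PySem.Dict.empty).getD h 0 < (rr.getD (daTgt hpd h s) PySem.Dict.empty).getD c 0
      then some (some c) else none := by
  unfold daOut
  rw [if_neg (by simp [hacc]), hh]

theorem daStep_decomp (hpd : PySem.Dict String (List String)) (rr : PySem.Dict String (PySem.Dict String Int)) (h : String) (s : DASt) :
    daStep hpd rr h s =
      ⟨dbump s.np h 1, maybeIns s.held (daOut hpd rr h s) (daTgt hpd h s) (some h),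
       remEff s.rem (daOut hpd rr h s) h⟩ := by
  rw [daStep_eq]
  rcases daOut hpd rr h s with _ | (_ | c) <;> rfl

theorem daStep_held_eq (hpd : PySem.Dict String (List String)) (rr : PySem.Dict String (PySem.Dict String Int)) (h : String) (s : DASt) :
    (daStep hpd rr h s).held = maybeIns s.held (daOut hpd rr h s) (daTgt hpd h s) (some h) := by
  rw [daStep_decomp]

theorem daStep_rem_eq (hpd : PySem.Dict String (List String)) (rr : PySem.Dict String (PySem.Dict String Int)) (h : String) (s : DASt) :
    (daStep hpd rr h s).rem = remEff s.rem (daOut hpd rr h s) h := by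
  rw [daStep_decomp]

theorem maybeIns_comm (d : PySem.Dict String (Option String)) (o1 o2 : Option (Option String))
    (k1 k2 : String) (v1 v2 : Option String) (hne : k1 ≠ k2)
    (hc1 : o1 ≠ none → d.contains k1 = true) (hc2 : o2 ≠ none → d.contains k2 = true) :
    maybeIns (maybeIns d o1 k1 v1) o2 k2 v2 = maybeIns (maybeIns d o2 k2 v2) o1 k1 v1 := by
  rcases o1 with _ | w1 <;> rcases o2 with _ | w2 <;> simp only [maybeIns]
  exact dict_insert_comm d k1 k2 v1 v2 hne (hc1 (by simp)) (hc2 (by simp))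

theorem remEff_comm (d : PySem.Dict String Int) (o1 o2 : Option (Option String)) (h1 h2 : String)
    (hc1 : d.contains h1 = true) (hc2 : d.contains h2 = true)
    (hco1 : ∀ c, o1 = some (some c) → d.contains c = true)
    (hco2 : ∀ c, o2 = some (some c) → d.contains c = true) :
    remEff (remEff d o1 h1) o2 h2 = remEff (remEff d o2 h2) o1 h1 := by
  rcases o1 with _ | (_ | c1) <;> rcases o2 with _ | (_ | c2) <;> simp only [remEff]
  · exact dbump_comm d h1 h2 (-1) (-1) hc1 hc2
  · exact dbump3a d h1 h2 c2 (-1) (-1) 1 hc1 hc2 (hco2 c2 rfl)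
  · exact dbump3b d h1 c1 h2 (-1) 1 (-1) hc1 (hco1 c1 rfl) hc2
  · exact dbump4 d h1 c1 h2 c2 (-1) 1 (-1) 1 hc1 (hco1 c1 rfl) hc2 (hco2 c2 rfl)

-- helper facts about outcomes
theorem daOut_ne_none_contains (hpd : PySem.Dict String (List String)) (rr : PySem.Dict String (PySem.Dict String Int)) (h : String) (s : DASt)
    (hrr : ∀ r, rr.contains r = true → s.held.contains r = true)
    (ho : daOut hpd rr h s ≠ none) : s.held.contains (daTgt hpd h s) = true := by
  unfold daOut at ho
  split at ho
  · exact absurd rfl ho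
  case isFalse hacc =>
    apply hrr
    apply rr_contains_of_rank_contains rr (daTgt hpd h s) h
    revert hacc
    cases (rr.getD (daTgt hpd h s) PySem.Dict.empty).contains h <;> simp

theorem daOut_displace_holder (hpd : PySem.Dict String (List String)) (rr : PySem.Dict String (PySem.Dict String Int)) (h : String) (s : DASt) (c : String)
    (ho : daOut hpd rr h s = some (some c)) : s.held.getD (daTgt hpd h s) none = some c := by
  unfold daOut at ho
  split at ho
  · exact absurd ho (by simp)
  · rcases hsc : s.held.getD (daTgt hpd h s) none with _ | c'
    · rw [hsc] at ho; simp at ho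
    · rw [hsc] at ho
      split at ho <;> simp_all

-- ---------- the diamond: distinct enabled hospitals' proposals commute ----------

theorem daComm (hpd : PySem.Dict String (List String)) (rr : PySem.Dict String (PySem.Dict String Int))
    (RRI : ∀ r, RankInj (rr.getD r PySem.Dict.empty)) (s : DASt)
    (hInv : daInv hpd rr s) (h1 h2 : String) (hne : h1 ≠ h2)
    (hE1 : daE hpd s h1) (hE2 : daE hpd s h2) :
    daStep hpd rr h2 (daStep hpd rr h1 s) = daStep hpd rr h1 (daStep hpd rr h2 s) := by
  obtain ⟨hnpN, hheldN, hremN, hnpc, hremc, hrrheld, hnp0, hhold⟩ := hInv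
  have hm1 := daE_mem_keys hpd s h1 hE1
  have hm2 := daE_mem_keys hpd s h2 hE2
  have cnp1 : s.np.contains h1 = true := hnpc h1 hm1
  have cnp2 : s.np.contains h2 = true := hnpc h2 hm2
  have crem1 : s.rem.contains h1 = true := hremc h1 hm1
  have crem2 : s.rem.contains h2 = true := hremc h2 hm2
  have t21 : daTgt hpd h2 (daStep hpd rr h1 s) = daTgt hpd h2 s := daTgt_step_ne hpd rr h1 h2 s (Ne.symm hne)
  have t12 : daTgt hpd h1 (daStep hpd rr h2 s) = daTgt hpd h1 s := daTgt_step_ne hpd rr h2 h1 s hne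
  have npcomm : dbump (dbump s.np h1 1) h2 1 = dbump (dbump s.np h2 1) h1 1 :=
    dbump_comm _ _ _ _ _ cnp1 cnp2
  have hcrem_hold : ∀ hh c, daOut hpd rr hh s = some (some c) → s.rem.contains c = true := by
    intro hh c ho
    have := daOut_displace_holder hpd rr hh s c ho
    exact hremc c (hhold _ c this).1
  by_cases hr : daTgt hpd h1 s = daTgt hpd h2 s
  case neg =>
    -- the two hospitals propose to different residents: their effects are independent
    have l21 : (daStep hpd rr h1 s).held.getD (daTgt hpd h2 s) none = s.held.getD (daTgt hpd h2 s) none := by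
      rw [daStep_held_getD]
      exact if_neg (fun hcon => hr hcon.2.symm)
    have l12 : (daStep hpd rr h2 s).held.getD (daTgt hpd h1 s) none = s.held.getD (daTgt hpd h1 s) none := by
      rw [daStep_held_getD]
      exact if_neg (fun hcon => hr hcon.2)
    have o21 : daOut hpd rr h2 (daStep hpd rr h1 s) = daOut hpd rr h2 s := by
      unfold daOut
      rw [t21, l21]
    have o12 : daOut hpd rr h1 (daStep hpd rr h2 s) = daOut hpd rr h1 s := by
      unfold daOut
      rw [t12, l12]

    rw [daStep_decomp hpd rr h2 (daStep hpd rr h1 s), o21, t21,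
       daStep_decomp hpd rr h1 (daStep hpd rr h2 s), o12, t12,
       daStep_np, daStep_np, daStep_held_eq, daStep_held_eq, daStep_rem_eq, daStep_rem_eq]
    simp only [DASt.mk.injEq]
    refine ⟨npcomm, ?_, ?_⟩
    · exact maybeIns_comm s.held _ _ _ _ _ _ hr
        (fun ho => daOut_ne_none_contains hpd rr h1 s hrrheld ho)
        (fun ho => daOut_ne_none_contains hpd rr h2 s hrrheld ho)
    · exact remEff_comm s.rem _ _ h1 h2 crem1 crem2 (hcrem_hold h1) (hcrem_hold h2)
  case pos =>
    -- both proposals go to the same resident; the resident ends up holding its best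
    -- of the two offers either way, and rank injectivity breaks every tie
    have hheld21 : (daStep hpd rr h1 s).held.getD (daTgt hpd h2 s) none =
        (maybeIns s.held (daOut hpd rr h1 s) (daTgt hpd h1 s) (some h1)).getD (daTgt hpd h2 s) none := by
      rw [daStep_held_eq]
    have hheld12 : (daStep hpd rr h2 s).held.getD (daTgt hpd h1 s) none =
        (maybeIns s.held (daOut hpd rr h2 s) (daTgt hpd h2 s) (some h2)).getD (daTgt hpd h1 s) none := by
      rw [daStep_held_eq]
    by_cases a1 : (rr.getD (daTgt hpd h1 s) PySem.Dict.empty).contains h1 = false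
    · -- h1 unacceptable: its step only advances np
      have o1 := daOut_of_not_acc hpd rr h1 s a1
      have o12 : daOut hpd rr h1 (daStep hpd rr h2 s) = none := by
        apply daOut_of_not_acc
        rw [t12]
        exact a1
      have o21 : daOut hpd rr h2 (daStep hpd rr h1 s) = daOut hpd rr h2 s := by
        unfold daOut
        rw [t21, daStep_held_eq, o1, maybeIns_none]
      have o2 : daOut hpd rr h2 s = daOut hpd rr h2 s := rfl
      rw [daStep_decomp hpd rr h2 (daStep hpd rr h1 s), daStep_decomp hpd rr h1 (daStep hpd rr h2 s),
         o21, o12]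
      simp only [t21, t12, daStep_np, daStep_held_eq, daStep_rem_eq, o1, o2, maybeIns_none,
        maybeIns_some, remEff_none, remEff_some_none, remEff_some_some, DASt.mk.injEq]
      simp [npcomm]
    · by_cases a2 : (rr.getD (daTgt hpd h2 s) PySem.Dict.empty).contains h2 = false
      · -- h2 unacceptable
        have o2 := daOut_of_not_acc hpd rr h2 s a2
        have o21 : daOut hpd rr h2 (daStep hpd rr h1 s) = none := by
          apply daOut_of_not_acc
          rw [t21]
          exact a2
        have o12 : daOut hpd rr h1 (daStep hpd rr h2 s) = daOut hpd rr h1 s := by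
          unfold daOut
          rw [t12, daStep_held_eq, o2, maybeIns_none]
        have o1 : daOut hpd rr h1 s = daOut hpd rr h1 s := rfl
        rw [daStep_decomp hpd rr h2 (daStep hpd rr h1 s), daStep_decomp hpd rr h1 (daStep hpd rr h2 s),
           o21, o12]
        simp only [t21, t12, daStep_np, daStep_held_eq, daStep_rem_eq, o1, o2, maybeIns_none,
          maybeIns_some, remEff_none, remEff_some_none, remEff_some_some, DASt.mk.injEq]
        simp [npcomm]
      · -- both acceptable
        have a1' : (rr.getD (daTgt hpd h1 s) PySem.Dict.empty).contains h1 = true := by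
          revert a1; cases (rr.getD (daTgt hpd h1 s) PySem.Dict.empty).contains h1 <;> simp
        have a2' : (rr.getD (daTgt hpd h1 s) PySem.Dict.empty).contains h2 = true := by
          rw [hr]
          revert a2; cases (rr.getD (daTgt hpd h2 s) PySem.Dict.empty).contains h2 <;> simp
        have hk12 : (rr.getD (daTgt hpd h1 s) PySem.Dict.empty).getD h1 0 ≠
            (rr.getD (daTgt hpd h1 s) PySem.Dict.empty).getD h2 0 :=
          fun he => hne (RRI (daTgt hpd h1 s) h1 h2 a1' a2' he)
        rcases hheld : s.held.getD (daTgt hpd h1 s) none with _ | c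
        · -- resident currently free
          have o1 : daOut hpd rr h1 s = some none := daOut_of_acc_none hpd rr h1 s a1' hheld
          have o2 : daOut hpd rr h2 s = some none := by
            apply daOut_of_acc_none hpd rr h2 s (by rw [← hr]; exact a2')
            rw [← hr]
            exact hheld
          have lk21 : (daStep hpd rr h1 s).held.getD (daTgt hpd h2 s) none = some h1 := by
            rw [daStep_held_eq, o1, maybeIns_some, ← hr, PySem.Dict.getD_insert_self]
          have lk12 : (daStep hpd rr h2 s).held.getD (daTgt hpd h1 s) none = some h2 := by
            rw [daStep_held_eq, o2, maybeIns_some, hr, PySem.Dict.getD_insert_self]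
          have o21 := daOut_of_acc_some hpd rr h2 (daStep hpd rr h1 s) h1
            (by rw [t21, ← hr]; exact a2') (by rw [t21]; rw [← hr] at lk21 ⊢; exact lk21)
          have o12 := daOut_of_acc_some hpd rr h1 (daStep hpd rr h2 s) h2
            (by rw [t12]; exact a1') (by rw [t12]; exact lk12)
          rw [t21, ← hr] at o21
          rw [t12] at o12
          by_cases hk : (rr.getD (daTgt hpd h1 s) PySem.Dict.empty).getD h2 0 <
              (rr.getD (daTgt hpd h1 s) PySem.Dict.empty).getD h1 0
          · rw [if_pos hk] at o21
            rw [if_neg (by omega)] at o12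
            rw [daStep_decomp hpd rr h2 (daStep hpd rr h1 s), daStep_decomp hpd rr h1 (daStep hpd rr h2 s),
               o21, o12]
            simp only [t21, t12, daStep_np, daStep_held_eq, daStep_rem_eq, o1, o2, maybeIns_none,
              maybeIns_some, remEff_none, remEff_some_none, remEff_some_some, DASt.mk.injEq]
            refine ⟨npcomm, ?_, ?_⟩
            · rw [← hr, PySem.Dict.insert_insert_self]
            · rw [dbump_comm s.rem h1 h2 (-1) (-1) crem1 crem2,
                 dbump_cancel' (dbump s.rem h2 (-1)) h1 (-1) 1 (by omega)
                   (contains_dbump_of _ _ _ _ crem1) (nodup_keys_dbump _ _ _ hremN)]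
          · have hk' : (rr.getD (daTgt hpd h1 s) PySem.Dict.empty).getD h1 0 <
                (rr.getD (daTgt hpd h1 s) PySem.Dict.empty).getD h2 0 := by omega
            rw [if_neg (by omega)] at o21
            rw [if_pos hk'] at o12
            rw [daStep_decomp hpd rr h2 (daStep hpd rr h1 s), daStep_decomp hpd rr h1 (daStep hpd rr h2 s),
               o21, o12]
            simp only [t21, t12, daStep_np, daStep_held_eq, daStep_rem_eq, o1, o2, maybeIns_none,
              maybeIns_some, remEff_none, remEff_some_none, remEff_some_some, DASt.mk.injEq]
            refine ⟨npcomm, ?_, ?_⟩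
            · rw [hr, PySem.Dict.insert_insert_self]
            · rw [dbump_comm s.rem h2 h1 (-1) (-1) crem2 crem1,
                 dbump_cancel' (dbump s.rem h1 (-1)) h2 (-1) 1 (by omega)
                   (contains_dbump_of _ _ _ _ crem2) (nodup_keys_dbump _ _ _ hremN)]
        · -- resident currently held by c
          have hold := hhold (daTgt hpd h1 s) c hheld
          have crc : s.rem.contains c = true := hremc c hold.1
          have accc : (rr.getD (daTgt hpd h1 s) PySem.Dict.empty).contains c = true := hold.2.2.2
          have o1 := daOut_of_acc_some hpd rr h1 s c a1' hheld
          have o2 : daOut hpd rr h2 s =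
              if (rr.getD (daTgt hpd h1 s) PySem.Dict.empty).getD h2 0 <
                 (rr.getD (daTgt hpd h1 s) PySem.Dict.empty).getD c 0
              then some (some c) else none := by
            have := daOut_of_acc_some hpd rr h2 s c (by rw [← hr]; exact a2') (by rw [← hr]; exact hheld)
            rw [this, ← hr]
          by_cases q1 : (rr.getD (daTgt hpd h1 s) PySem.Dict.empty).getD h1 0 <
              (rr.getD (daTgt hpd h1 s) PySem.Dict.empty).getD c 0
          · by_cases q2 : (rr.getD (daTgt hpd h1 s) PySem.Dict.empty).getD h2 0 <
                (rr.getD (daTgt hpd h1 s) PySem.Dict.empty).getD c 0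
            · -- both would displace c; the better-ranked one ends up holding
              rw [if_pos q1] at o1
              rw [if_pos q2] at o2
              have lk21 : (daStep hpd rr h1 s).held.getD (daTgt hpd h2 s) none = some h1 := by
                rw [daStep_held_eq, o1, maybeIns_some, ← hr, PySem.Dict.getD_insert_self]
              have lk12 : (daStep hpd rr h2 s).held.getD (daTgt hpd h1 s) none = some h2 := by
                rw [daStep_held_eq, o2, maybeIns_some, hr, PySem.Dict.getD_insert_self]
              have o21 := daOut_of_acc_some hpd rr h2 (daStep hpd rr h1 s) h1
                (by rw [t21, ← hr]; exact a2') (by rw [t21]; rw [← hr] at lk21 ⊢; exact lk21)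
              have o12 := daOut_of_acc_some hpd rr h1 (daStep hpd rr h2 s) h2
                (by rw [t12]; exact a1') (by rw [t12]; exact lk12)
              rw [t21, ← hr] at o21
              rw [t12] at o12
              by_cases hk : (rr.getD (daTgt hpd h1 s) PySem.Dict.empty).getD h2 0 <
                  (rr.getD (daTgt hpd h1 s) PySem.Dict.empty).getD h1 0
              · rw [if_pos hk] at o21
                rw [if_neg (by omega)] at o12
                rw [daStep_decomp hpd rr h2 (daStep hpd rr h1 s), daStep_decomp hpd rr h1 (daStep hpd rr h2 s),
                   o21, o12]
                simp only [t21, t12, daStep_np, daStep_held_eq, daStep_rem_eq, o1, o2, maybeIns_none,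
                  maybeIns_some, remEff_none, remEff_some_none, remEff_some_some, DASt.mk.injEq]
                refine ⟨npcomm, ?_, ?_⟩
                · rw [← hr, PySem.Dict.insert_insert_self]
                · -- h1's take-and-release cancels
                  rw [dbump_comm s.rem h1 c (-1) 1 crem1 crc,
                     dbump_comm (dbump s.rem c 1) h1 h2 (-1) (-1)
                       (contains_dbump_of _ _ _ _ crem1) (contains_dbump_of _ _ _ _ crem2),
                     dbump_cancel' (dbump (dbump s.rem c 1) h2 (-1)) h1 (-1) 1 (by omega)
                       (contains_dbump_of _ _ _ _ (contains_dbump_of _ _ _ _ crem1))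
                       (nodup_keys_dbump _ _ _ (nodup_keys_dbump _ _ _ hremN)),
                     dbump_comm s.rem c h2 1 (-1) crc crem2]
              · have hk' : (rr.getD (daTgt hpd h1 s) PySem.Dict.empty).getD h1 0 <
                    (rr.getD (daTgt hpd h1 s) PySem.Dict.empty).getD h2 0 := by omega
                rw [if_neg (by omega)] at o21
                rw [if_pos hk'] at o12
                rw [daStep_decomp hpd rr h2 (daStep hpd rr h1 s), daStep_decomp hpd rr h1 (daStep hpd rr h2 s),
                   o21, o12]
                simp only [t21, t12, daStep_np, daStep_held_eq, daStep_rem_eq, o1, o2, maybeIns_none,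
                  maybeIns_some, remEff_none, remEff_some_none, remEff_some_some, DASt.mk.injEq]
                refine ⟨npcomm, ?_, ?_⟩
                · rw [hr, PySem.Dict.insert_insert_self]
                · rw [dbump_comm s.rem h2 c (-1) 1 crem2 crc,
                     dbump_comm (dbump s.rem c 1) h2 h1 (-1) (-1)
                       (contains_dbump_of _ _ _ _ crem2) (contains_dbump_of _ _ _ _ crem1),
                     dbump_cancel' (dbump (dbump s.rem c 1) h1 (-1)) h2 (-1) 1 (by omega)
                       (contains_dbump_of _ _ _ _ (contains_dbump_of _ _ _ _ crem2))
                       (nodup_keys_dbump _ _ _ (nodup_keys_dbump _ _ _ hremN)),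
                     dbump_comm s.rem c h1 1 (-1) crc crem1]
            · -- only h1 displaces
              rw [if_pos q1] at o1
              rw [if_neg q2] at o2
              have lk21 : (daStep hpd rr h1 s).held.getD (daTgt hpd h2 s) none = some h1 := by
                rw [daStep_held_eq, o1, maybeIns_some, ← hr, PySem.Dict.getD_insert_self]
              have o21 := daOut_of_acc_some hpd rr h2 (daStep hpd rr h1 s) h1
                (by rw [t21, ← hr]; exact a2') (by rw [t21]; rw [← hr] at lk21 ⊢; exact lk21)
              rw [t21, ← hr] at o21
              rw [if_neg (by omega)] at o21
              have o12 : daOut hpd rr h1 (daStep hpd rr h2 s) =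
                  daOut hpd rr h1 s := by
                unfold daOut
                rw [t12, daStep_held_eq, o2, maybeIns_none]
              rw [daStep_decomp hpd rr h2 (daStep hpd rr h1 s), daStep_decomp hpd rr h1 (daStep hpd rr h2 s),
                 o21, o12]
              simp only [t21, t12, daStep_np, daStep_held_eq, daStep_rem_eq, o1, o2, maybeIns_none,
                maybeIns_some, remEff_none, remEff_some_none, remEff_some_some, DASt.mk.injEq]
              simp [npcomm]
          · by_cases q2 : (rr.getD (daTgt hpd h1 s) PySem.Dict.empty).getD h2 0 <
                (rr.getD (daTgt hpd h1 s) PySem.Dict.empty).getD c 0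
            · -- only h2 displaces
              rw [if_neg q1] at o1
              rw [if_pos q2] at o2
              have lk12 : (daStep hpd rr h2 s).held.getD (daTgt hpd h1 s) none = some h2 := by
                rw [daStep_held_eq, o2, maybeIns_some, hr, PySem.Dict.getD_insert_self]
              have o12 := daOut_of_acc_some hpd rr h1 (daStep hpd rr h2 s) h2
                (by rw [t12]; exact a1') (by rw [t12]; exact lk12)
              rw [t12] at o12
              rw [if_neg (by omega)] at o12
              have o21 : daOut hpd rr h2 (daStep hpd rr h1 s) =
                  daOut hpd rr h2 s := by
                unfold daOut
                rw [t21, daStep_held_eq, o1, maybeIns_none]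
              rw [daStep_decomp hpd rr h2 (daStep hpd rr h1 s), daStep_decomp hpd rr h1 (daStep hpd rr h2 s),
                 o21, o12]
              simp only [t21, t12, daStep_np, daStep_held_eq, daStep_rem_eq, o1, o2, maybeIns_none,
                maybeIns_some, remEff_none, remEff_some_none, remEff_some_some, DASt.mk.injEq]
              simp [npcomm, hr]
            · -- neither displaces
              rw [if_neg q1] at o1
              rw [if_neg q2] at o2
              have o21 : daOut hpd rr h2 (daStep hpd rr h1 s) = daOut hpd rr h2 s := by
                unfold daOut
                rw [t21, daStep_held_eq, o1, maybeIns_none]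
              have o12 : daOut hpd rr h1 (daStep hpd rr h2 s) = daOut hpd rr h1 s := by
                unfold daOut
                rw [t12, daStep_held_eq, o2, maybeIns_none]
              rw [daStep_decomp hpd rr h2 (daStep hpd rr h1 s), daStep_decomp hpd rr h1 (daStep hpd rr h2 s),
                 o21, o12]
              simp only [t21, t12, daStep_np, daStep_held_eq, daStep_rem_eq, o1, o2, maybeIns_none,
                maybeIns_some, remEff_none, remEff_some_none, remEff_some_some, DASt.mk.injEq]
              simp [npcomm]

-- ---------- normal-form machinery ----------

theorem daFirstE_none (hpd : PySem.Dict String (List String)) (s : DASt)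
    (h : daFirstE hpd s = none) : ∀ x, ¬ daE hpd s x := by
  intro x hx
  have hmem := daE_mem_keys hpd s x hx
  unfold daFirstE at h
  exact (List.find?_eq_none.mp h) x hmem hx

theorem daFirstE_some (hpd : PySem.Dict String (List String)) (s : DASt) (h : String)
    (hf : daFirstE hpd s = some h) : daE hpd s h :=
  List.find?_some hf

theorem daNf_of_none (hpd : PySem.Dict String (List String)) (rr : PySem.Dict String (PySem.Dict String Int)) (s : DASt)
    (hf : daFirstE hpd s = none) : ∀ fuel, daNf hpd rr fuel s = s
  | 0 => rfl
  | f + 1 => by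
    show (match daFirstE hpd s with
      | none => s
      | some h => daNf hpd rr f (daStep hpd rr h s)) = s
    rw [hf]

theorem daNf_succ (hpd : PySem.Dict String (List String)) (rr : PySem.Dict String (PySem.Dict String Int)) (s : DASt) (h : String) (f : Nat)
    (hf : daFirstE hpd s = some h) : daNf hpd rr (f + 1) s = daNf hpd rr f (daStep hpd rr h s) := by
  show (match daFirstE hpd s with
    | none => s
    | some h => daNf hpd rr f (daStep hpd rr h s)) = _
  rw [hf]

theorem daNf_fuel (hpd : PySem.Dict String (List String)) (rr : PySem.Dict String (PySem.Dict String Int)) :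
    ∀ fuel, ∀ s : DASt, daMeas hpd s ≤ fuel → daNf hpd rr fuel s = daNf hpd rr (daMeas hpd s) s := by
  intro fuel
  induction fuel using Nat.strong_induction_on with
  | _ fuel ih =>
    intro s hle
    match fuel with
    | 0 =>
      obtain hm : daMeas hpd s = 0 := by omega
      rw [hm]
    | f + 1 =>
      rcases hf : daFirstE hpd s with _ | h
      · rw [daNf_of_none hpd rr s hf, daNf_of_none hpd rr s hf]
      · have hE := daFirstE_some hpd s h hf
        have hlt := daMeas_step_lt hpd rr h s hE
        obtain ⟨m, hm⟩ : ∃ m, daMeas hpd s = m + 1 := ⟨daMeas hpd s - 1, by have := daMeas_pos hpd s h hE; omega⟩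
        have e1 := daNf_succ hpd rr s h f hf
        have e2 : daNf hpd rr (daMeas hpd s) s = daNf hpd rr m (daStep hpd rr h s) := by
          rw [hm, daNf_succ hpd rr s h m hf]
        rw [e1, e2, ih f (by omega) _ (by omega), ih m (by omega) _ (by omega)]

theorem daNf_inv (hpd : PySem.Dict String (List String)) (rr : PySem.Dict String (PySem.Dict String Int)) :
    ∀ fuel (s : DASt), daInv hpd rr s → daInv hpd rr (daNf hpd rr fuel s)
  | 0, s, hInv => hInv
  | f + 1, s, hInv => by
    rcases hf : daFirstE hpd s with _ | h
    · rw [daNf_of_none hpd rr s hf]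
      exact hInv
    · rw [daNf_succ hpd rr s h f hf]
      exact daNf_inv hpd rr f _ (daInv_step hpd rr h s hInv (daFirstE_some hpd s h hf))

-- the exchange lemma: stepping any enabled hospital first does not change the normal form
theorem daNf_step (hpd : PySem.Dict String (List String)) (rr : PySem.Dict String (PySem.Dict String Int))
    (RRI : ∀ r, RankInj (rr.getD r PySem.Dict.empty)) :
    ∀ fuel, ∀ (s : DASt) (h : String), daMeas hpd s ≤ fuel → daInv hpd rr s → daE hpd s h →
      daNf hpd rr fuel (daStep hpd rr h s) = daNf hpd rr fuel s := by
  intro fuel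
  induction fuel using Nat.strong_induction_on with
  | _ fuel ih =>
    intro s h hle hInv hE
    have hpos := daMeas_pos hpd s h hE
    match fuel with
    | 0 => omega
    | f + 1 =>
      rcases hf : daFirstE hpd s with _ | h0
      · exact absurd hE (daFirstE_none hpd s hf h)
      · have hE0 := daFirstE_some hpd s h0 hf
        have hstep_le : daMeas hpd (daStep hpd rr h s) ≤ f := by
          have := daMeas_step_lt hpd rr h s hE
          omega
        by_cases hh : h = h0
        · subst hh
          rw [daNf_succ hpd rr s h f hf]
          exact (daNf_fuel hpd rr (f+1) (daStep hpd rr h s) (by omega)).trans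
            (daNf_fuel hpd rr f (daStep hpd rr h s) hstep_le).symm
        · have hstep0_le : daMeas hpd (daStep hpd rr h0 s) ≤ f := by
            have := daMeas_step_lt hpd rr h0 s hE0
            omega
          have hcomm := daComm hpd rr RRI s hInv h h0 hh hE hE0
          have hE0' : daE hpd (daStep hpd rr h s) h0 := daE_mono hpd rr h h0 s (Ne.symm hh) hE0
          have hE' : daE hpd (daStep hpd rr h0 s) h := daE_mono hpd rr h0 h s hh hE
          have hInvh : daInv hpd rr (daStep hpd rr h s) := daInv_step hpd rr h s hInv hE
          have hInv0 : daInv hpd rr (daStep hpd rr h0 s) := daInv_step hpd rr h0 s hInv hE0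
          calc daNf hpd rr (f+1) (daStep hpd rr h s)
              = daNf hpd rr f (daStep hpd rr h s) :=
                (daNf_fuel hpd rr (f+1) _ (by omega)).trans (daNf_fuel hpd rr f _ hstep_le).symm
            _ = daNf hpd rr f (daStep hpd rr h0 (daStep hpd rr h s)) :=
                (ih f (by omega) (daStep hpd rr h s) h0 hstep_le hInvh hE0').symm
            _ = daNf hpd rr f (daStep hpd rr h (daStep hpd rr h0 s)) := by rw [hcomm]
            _ = daNf hpd rr f (daStep hpd rr h0 s) :=
                ih f (by omega) (daStep hpd rr h0 s) h hstep0_le hInv0 hE'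
            _ = daNf hpd rr (f+1) s := (daNf_succ hpd rr s h0 f hf).symm

theorem daNFP_step (hpd : PySem.Dict String (List String)) (rr : PySem.Dict String (PySem.Dict String Int))
    (RRI : ∀ r, RankInj (rr.getD r PySem.Dict.empty)) (s : DASt) (h : String)
    (hInv : daInv hpd rr s) (hE : daE hpd s h) :
    daNFP hpd rr (daStep hpd rr h s) = daNFP hpd rr s := by
  unfold daNFP
  rw [daNf_fuel hpd rr (daMeas hpd (daStep hpd rr h s)) _ (le_refl _),
     ← daNf_fuel hpd rr (daMeas hpd s) (daStep hpd rr h s) (by have := daMeas_step_lt hpd rr h s hE; omega)]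
  exact daNf_step hpd rr RRI (daMeas hpd s) s h (le_refl _) hInv hE

theorem daNFP_fix (hpd : PySem.Dict String (List String)) (rr : PySem.Dict String (PySem.Dict String Int)) (s : DASt)
    (hnone : ∀ x, ¬ daE hpd s x) : daNFP hpd rr s = s := by
  unfold daNFP
  rcases hf : daFirstE hpd s with _ | h
  · exact daNf_of_none hpd rr s hf _
  · exact absurd (daFirstE_some hpd s h hf) (hnone h)

theorem daNFP_inv (hpd : PySem.Dict String (List String)) (rr : PySem.Dict String (PySem.Dict String Int)) (s : DASt)
    (hInv : daInv hpd rr s) : daInv hpd rr (daNFP hpd rr s) :=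
  daNf_inv hpd rr (daMeas hpd s) s hInv

-- ---------- A's loop reaches the normal form ----------

theorem daStep_rem_getD_ne (hpd : PySem.Dict String (List String)) (rr : PySem.Dict String (PySem.Dict String Int)) (h : String) (s : DASt) (h' : String)
    (hne : h' ≠ h) (hnc : ∀ c, daOut hpd rr h s = some (some c) → h' ≠ c) :
    (daStep hpd rr h s).rem.getD h' 0 = s.rem.getD h' 0 := by
  rw [daStep_rem_eq]
  rcases ho : daOut hpd rr h s with _ | (_ | c)
  · rfl
  · rw [remEff_some_none, getD_dbump, if_neg hne]
  · rw [remEff_some_some, getD_dbump, if_neg (hnc c ho), getD_dbump, if_neg hne]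

theorem daE_back (hpd : PySem.Dict String (List String)) (rr : PySem.Dict String (PySem.Dict String Int)) (h : String) (s : DASt) (h' : String)
    (hne : h' ≠ h) (hnc : ∀ c, daOut hpd rr h s = some (some c) → h' ≠ c)
    (hE' : daE hpd (daStep hpd rr h s) h') : daE hpd s h' := by
  rw [daE_iff] at hE' ⊢
  rw [daStep_np_getD_ne hpd rr h h' s hne, daStep_rem_getD_ne hpd rr h s h' hne hnc] at hE'
  exact hE'

theorem loopA_eq (hpd : PySem.Dict String (List String)) (rr : PySem.Dict String (PySem.Dict String Int))
    (RRI : ∀ r, RankInj (rr.getD r PySem.Dict.empty)) :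
    ∀ fuel (q : List String) (s : DASt), daInv hpd rr s → (∀ h, daE hpd s h → h ∈ q) →
      q.length + 2 * daMeas hpd s ≤ fuel → loopA hpd rr fuel q s = daNFP hpd rr s := by
  intro fuel
  induction fuel with
  | zero =>
    intro q s hInv hcov hle
    have hq : q = [] := by
      rw [← List.length_eq_zero_iff]
      omega
    subst hq
    have hno : ∀ x, ¬ daE hpd s x := fun x hx => by simpa using hcov x hx
    rw [daNFP_fix hpd rr s hno]
    rfl
  | succ f ih =>
    intro q s hInv hcov hle
    rcases q with _ | ⟨h, qs⟩
    · have hno : ∀ x, ¬ daE hpd s x := fun x hx => by simpa using hcov x hx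
      rw [daNFP_fix hpd rr s hno]
      rfl
    · have hnp0 : ∀ x, 0 ≤ s.np.getD x 0 := hInv.2.2.2.2.2.2.1
      simp only [loopA]
      by_cases hcond : ((hpd.getD h []).length : Int) ≤ s.np.getD h 0 ∨ s.rem.getD h 0 ≤ 0
      · rw [if_pos hcond]
        refine ih qs s hInv ?_ (by simp at hle; omega)
        intro h' hE'
        rcases List.mem_cons.mp (hcov h' hE') with hh | hh
        · subst hh
          rw [daE_iff] at hE'
          omega
        · exact hh
      · rw [if_neg hcond]
        push_neg at hcond
        have hE : daE hpd s h := by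
          rw [daE_iff]
          exact ⟨by omega, hnp0 h, by omega⟩
        have hInv' := daInv_step hpd rr h s hInv hE
        have hnp0' : ∀ x, 0 ≤ (daStep hpd rr h s).np.getD x 0 := hInv'.2.2.2.2.2.2.1
        have hNFP := daNFP_step hpd rr RRI s h hInv hE
        have hmeas := daMeas_step_lt hpd rr h s hE
        have hlen : qs.length + 1 + 2 * daMeas hpd s ≤ f + 1 := by simpa using hle
        by_cases hacc : (rr.getD (PySem.List.pyGetD (hpd.getD h []) (s.np.getD h 0) "") PySem.Dict.empty).contains h = false
        · rw [if_pos hacc]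
          have ho : daOut hpd rr h s = none := daOut_of_not_acc hpd rr h s hacc
          rw [ih _ _ hInv' ?_ ?_, hNFP]
          · intro h' hE'
            by_cases hh : h' = h
            · subst hh
              rw [daE_iff] at hE'
              rw [if_pos ⟨hE'.1, hE'.2.2⟩]
              simp
            · have hEs := daE_back hpd rr h s h' hh (fun c hc => by rw [ho] at hc; cases hc) hE'
              rcases List.mem_cons.mp (hcov h' hEs) with h1 | h1
              · exact absurd h1 hh
              · exact List.mem_append_left _ h1
          · have : (qs ++ if 0 < (daStep hpd rr h s).rem.getD h 0 ∧ (daStep hpd rr h s).np.getD h 0 < ((hpd.getD h []).length : Int) then [h] else []).length ≤ qs.length + 1 := by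
              split <;> simp
            omega
        · rw [if_neg hacc]
          have hacc' : (rr.getD (PySem.List.pyGetD (hpd.getD h []) (s.np.getD h 0) "") PySem.Dict.empty).contains h = true := by
            revert hacc; cases (rr.getD (PySem.List.pyGetD (hpd.getD h []) (s.np.getD h 0) "") PySem.Dict.empty).contains h <;> simp
          rcases hheld : s.held.getD (PySem.List.pyGetD (hpd.getD h []) (s.np.getD h 0) "") none with _ | c
          · -- resident free: fresh accept
            simp only [hheld]
            have ho : daOut hpd rr h s = some none := daOut_of_acc_none hpd rr h s hacc' hheld
            rw [ih _ _ hInv' ?_ ?_, hNFP]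
            · intro h' hE'
              by_cases hh : h' = h
              · subst hh
                rw [daE_iff] at hE'
                rw [if_pos ⟨hE'.1, hE'.2.2⟩]
                simp
              · have hEs := daE_back hpd rr h s h' hh (fun c hc => by rw [ho] at hc; cases hc) hE'
                rcases List.mem_cons.mp (hcov h' hEs) with h1 | h1
                · exact absurd h1 hh
                · exact List.mem_append_left _ (List.mem_append_left _ h1)
            · have : (List.length ([] : List String)) = 0 := rfl
              have h2 : ∀ (b : List String) (p : Prop) [Decidable p], (if p then [h] else []).length ≤ 1 := by
                intro b p hp
                split <;> simp
              have := h2 [] (0 < (daStep hpd rr h s).rem.getD h 0 ∧ (daStep hpd rr h s).np.getD h 0 < ((hpd.getD h []).length : Int))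
              simp only [List.append_assoc, List.length_append]
              omega
          · -- resident held by c
            simp only [hheld]
            have ho := daOut_of_acc_some hpd rr h s c hacc' hheld
            rw [ih _ _ hInv' ?_ ?_, hNFP]
            · intro h' hE'
              by_cases hh : h' = h
              · subst hh
                rw [daE_iff] at hE'
                refine List.mem_append_right _ ?_
                rw [if_pos ⟨hE'.1, hE'.2.2⟩]
                simp
              · by_cases hrank : (rr.getD (PySem.List.pyGetD (hpd.getD h []) (s.np.getD h 0) "") PySem.Dict.empty).getD h 0 <
                    (rr.getD (PySem.List.pyGetD (hpd.getD h []) (s.np.getD h 0) "") PySem.Dict.empty).getD c 0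
                · by_cases hc : h' = c
                  · subst hc
                    rw [daE_iff] at hE'
                    refine List.mem_append_left _ (List.mem_append_right _ ?_)
                    rw [if_pos ⟨hrank, hE'.1, hE'.2.2⟩]
                    simp
                  · have hrankT : (rr.getD (daTgt hpd h s) PySem.Dict.empty).getD h 0 <
                        (rr.getD (daTgt hpd h s) PySem.Dict.empty).getD c 0 := hrank
                    have hEs := daE_back hpd rr h s h' hh
                      (fun c' hc' => by
                        rw [ho, if_pos hrankT] at hc'
                        obtain rfl : c' = c := by simpa using hc'.symm
                        exact hc) hE'
                    rcases List.mem_cons.mp (hcov h' hEs) with h1 | h1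
                    · exact absurd h1 hh
                    · exact List.mem_append_left _ (List.mem_append_left _ h1)
                · have hrankF : ¬ (rr.getD (daTgt hpd h s) PySem.Dict.empty).getD h 0 <
                      (rr.getD (daTgt hpd h s) PySem.Dict.empty).getD c 0 := hrank
                  have hEs := daE_back hpd rr h s h' hh
                    (fun c' hc' => by rw [ho, if_neg hrankF] at hc'; cases hc') hE'
                  rcases List.mem_cons.mp (hcov h' hEs) with h1 | h1
                  · exact absurd h1 hh
                  · exact List.mem_append_left _ (List.mem_append_left _ h1)
            · have h1 : ∀ (p : Prop) [Decidable p] (x : String), (if p then [x] else []).length ≤ 1 := by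
                intro p hp x
                split <;> simp
              have := h1 ((rr.getD (PySem.List.pyGetD (hpd.getD h []) (s.np.getD h 0) "") PySem.Dict.empty).getD h 0 <
                    (rr.getD (PySem.List.pyGetD (hpd.getD h []) (s.np.getD h 0) "") PySem.Dict.empty).getD c 0 ∧
                  0 < (daStep hpd rr h s).rem.getD c 0 ∧ (daStep hpd rr h s).np.getD c 0 < ((hpd.getD c []).length : Int)) c
              have := h1 (0 < (daStep hpd rr h s).rem.getD h 0 ∧ (daStep hpd rr h s).np.getD h 0 < ((hpd.getD h []).length : Int)) h
              simp only [List.append_assoc, List.length_append]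
              omega

-- ---------- B's deletion-based step coincides with daStep ----------

-- if the offer fails the alive test (or the resident already holds h), A's step would reject too
theorem bout_none (hpd : PySem.Dict String (List String)) (rr : PySem.Dict String (PySem.Dict String Int))
    (al : PySem.Dict String (PySem.Set String)) (h : String) (s : DASt)
    (hAl : AliveInv rr al s.held)
    (hskip : h ∉ al.getD (daTgt hpd h s) ([] : PySem.Set String) ∨ s.held.getD (daTgt hpd h s) none = some h) :
    daOut hpd rr h s = none := by
  rcases hskip with hnm | hself
  · by_cases hc : (rr.getD (daTgt hpd h s) PySem.Dict.empty).contains h = false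
    · exact daOut_of_not_acc hpd rr h s hc
    · have hc' : (rr.getD (daTgt hpd h s) PySem.Dict.empty).contains h = true := by
        revert hc; cases (rr.getD (daTgt hpd h s) PySem.Dict.empty).contains h <;> simp
      have hnAl := (not_iff_not.mpr (hAl (daTgt hpd h s) h)).mp hnm
      push_neg at hnAl
      obtain ⟨c, hc1, hc2⟩ := hnAl hc'
      rw [daOut_of_acc_some hpd rr h s c hc' hc1, if_neg (by omega)]
  · by_cases hc : (rr.getD (daTgt hpd h s) PySem.Dict.empty).contains h = false
    · exact daOut_of_not_acc hpd rr h s hc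
    · have hc' : (rr.getD (daTgt hpd h s) PySem.Dict.empty).contains h = true := by
        revert hc; cases (rr.getD (daTgt hpd h s) PySem.Dict.empty).contains h <;> simp
      rw [daOut_of_acc_some hpd rr h s h hc' hself, if_neg (lt_irrefl _)]

-- if the offer survives the alive test, A's step would accept it (fresh or displacing)
theorem bout_accept (hpd : PySem.Dict String (List String)) (rr : PySem.Dict String (PySem.Dict String Int))
    (RRI : ∀ r, RankInj (rr.getD r PySem.Dict.empty))
    (al : PySem.Dict String (PySem.Set String)) (h : String) (s : DASt)
    (hInv : daInv hpd rr s) (hAl : AliveInv rr al s.held)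
    (hmem : h ∈ al.getD (daTgt hpd h s) ([] : PySem.Set String))
    (hne : s.held.getD (daTgt hpd h s) none ≠ some h) :
    daOut hpd rr h s = some (s.held.getD (daTgt hpd h s) none) := by
  obtain ⟨hcont, hle⟩ := (hAl (daTgt hpd h s) h).mp hmem
  rcases hheld : s.held.getD (daTgt hpd h s) none with _ | c
  · exact daOut_of_acc_none hpd rr h s hcont hheld
  · have hch : h ≠ c := fun he => hne (by rw [hheld, he])
    have hcc : (rr.getD (daTgt hpd h s) PySem.Dict.empty).contains c = true :=
      (hInv.2.2.2.2.2.2.2 (daTgt hpd h s) c hheld).2.2.2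
    have hlt : (rr.getD (daTgt hpd h s) PySem.Dict.empty).getD h 0 <
        (rr.getD (daTgt hpd h s) PySem.Dict.empty).getD c 0 := by
      have hle' := hle c hheld
      rcases lt_or_eq_of_le hle' with hlt | heq
      · exact hlt
      · exact absurd (RRI (daTgt hpd h s) h c hcont hcc heq) hch
    rw [daOut_of_acc_some hpd rr h s c hcont hheld, if_pos hlt]

theorem bstep_skip (hpd : PySem.Dict String (List String)) (rr : PySem.Dict String (PySem.Dict String Int))
    (al : PySem.Dict String (PySem.Set String)) (h : String) (s : DASt)
    (hAl : AliveInv rr al s.held)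
    (hskip : h ∉ al.getD (daTgt hpd h s) ([] : PySem.Set String) ∨ s.held.getD (daTgt hpd h s) none = some h) :
    (⟨s.np.insert h (s.np.getD h 0 + 1), s.held, s.rem⟩ : DASt) = daStep hpd rr h s := by
  rw [daStep_eq, bout_none hpd rr al h s hAl hskip]
  rfl

theorem bstep_accept_none (hpd : PySem.Dict String (List String)) (rr : PySem.Dict String (PySem.Dict String Int))
    (RRI : ∀ r, RankInj (rr.getD r PySem.Dict.empty))
    (al : PySem.Dict String (PySem.Set String)) (h : String) (s : DASt)
    (hInv : daInv hpd rr s) (hAl : AliveInv rr al s.held)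
    (hmem : h ∈ al.getD (daTgt hpd h s) ([] : PySem.Set String))
    (hheld : s.held.getD (daTgt hpd h s) none = none) :
    (⟨s.np.insert h (s.np.getD h 0 + 1), s.held.insert (daTgt hpd h s) (some h),
      s.rem.insert h (s.rem.getD h 0 - 1)⟩ : DASt) = daStep hpd rr h s := by
  have hne : s.held.getD (daTgt hpd h s) none ≠ some h := by rw [hheld]; simp
  rw [daStep_eq, bout_accept hpd rr RRI al h s hInv hAl hmem hne, hheld]
  simp [dbump, sub_eq_add_neg]

theorem bstep_accept_some (hpd : PySem.Dict String (List String)) (rr : PySem.Dict String (PySem.Dict String Int))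
    (RRI : ∀ r, RankInj (rr.getD r PySem.Dict.empty))
    (al : PySem.Dict String (PySem.Set String)) (h c : String) (s : DASt)
    (hInv : daInv hpd rr s) (hAl : AliveInv rr al s.held)
    (hmem : h ∈ al.getD (daTgt hpd h s) ([] : PySem.Set String))
    (hheld : s.held.getD (daTgt hpd h s) none = some c)
    (hne : s.held.getD (daTgt hpd h s) none ≠ some h) :
    (⟨s.np.insert h (s.np.getD h 0 + 1), s.held.insert (daTgt hpd h s) (some h),
      (s.rem.insert h (s.rem.getD h 0 - 1)).insert c ((s.rem.insert h (s.rem.getD h 0 - 1)).getD c 0 + 1)⟩ : DASt) = daStep hpd rr h s := by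
  rw [daStep_eq, bout_accept hpd rr RRI al h s hInv hAl hmem hne, hheld]
  simp [dbump, sub_eq_add_neg]

-- the alive invariant is restored after an accepted offer truncates the resident's set
theorem aliveInv_accept (rr : PySem.Dict String (PySem.Dict String Int))
    (al : PySem.Dict String (PySem.Set String)) (held : PySem.Dict String (Option String)) (tgt h : String)
    (hAl : AliveInv rr al held)
    (hmem : h ∈ al.getD tgt ([] : PySem.Set String)) :
    AliveInv rr
      (al.insert tgt ((al.getD tgt ([] : PySem.Set String)).filter
        (fun x => decide ((rr.getD tgt PySem.Dict.empty).getD x 0 ≤ (rr.getD tgt PySem.Dict.empty).getD h 0))))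
      (held.insert tgt (some h)) := by
  obtain ⟨hconh, hleh⟩ := (hAl tgt h).mp hmem
  intro r' x
  by_cases hr' : r' = tgt
  · subst hr'
    rw [PySem.Dict.getD_insert_self, PySem.Dict.getD_insert_self]
    constructor
    · intro hx
      obtain ⟨hx1, hx2⟩ := List.mem_filter.mp hx
      refine ⟨((hAl r' x).mp hx1).1, ?_⟩
      intro c hc
      obtain rfl : h = c := by simpa using hc
      simpa using hx2
    · intro ⟨hx1, hx2⟩
      have hxle : (rr.getD r' PySem.Dict.empty).getD x 0 ≤ (rr.getD r' PySem.Dict.empty).getD h 0 :=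
        hx2 h rfl
      refine List.mem_filter.mpr ⟨?_, by simpa using hxle⟩
      refine (hAl r' x).mpr ⟨hx1, ?_⟩
      intro c hc
      exact le_trans hxle (hleh c hc)
  · rw [PySem.Dict.getD_insert_of_ne _ _ _ hr', PySem.Dict.getD_insert_of_ne _ _ _ hr']
    exact hAl r' x

-- ---------- B's loops reach the normal form ----------

theorem loopBin_spec (hpd : PySem.Dict String (List String)) (rr : PySem.Dict String (PySem.Dict String Int))
    (RRI : ∀ r, RankInj (rr.getD r PySem.Dict.empty)) :
    ∀ fuel (h : String) (pending : List String) (s : DASt) (al : PySem.Dict String (PySem.Set String)) (X : List String),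
      daInv hpd rr s → AliveInv rr al s.held →
      (∀ h', daE hpd s h' → h' ∈ pending ∨ h' = h ∨ h' ∈ X) → daMeas hpd s < fuel →
      daNFP hpd rr (loopBin hpd rr fuel h pending s al).2.1 = daNFP hpd rr s ∧
      daInv hpd rr (loopBin hpd rr fuel h pending s al).2.1 ∧
      AliveInv rr (loopBin hpd rr fuel h pending s al).2.2 (loopBin hpd rr fuel h pending s al).2.1.held ∧
      (∀ h', daE hpd (loopBin hpd rr fuel h pending s al).2.1 h' → h' ∈ (loopBin hpd rr fuel h pending s al).1 ∨ h' ∈ X) ∧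
      (loopBin hpd rr fuel h pending s al).1.length + daMeas hpd (loopBin hpd rr fuel h pending s al).2.1 ≤
        pending.length + daMeas hpd s := by
  intro fuel
  induction fuel with
  | zero =>
    intro h pending s al X _ _ _ hlt
    omega
  | succ f ih =>
    intro h pending s al X hInv hAl hcov hlt
    have hnp0 : ∀ x, 0 ≤ s.np.getD x 0 := hInv.2.2.2.2.2.2.1
    have htgt : PySem.List.pyGetD (hpd.getD h []) (s.np.getD h 0) "" = daTgt hpd h s := rfl
    simp only [loopBin]
    by_cases hcond : 0 < s.rem.getD h 0 ∧ s.np.getD h 0 < ((hpd.getD h []).length : Int)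
    · rw [if_pos hcond]
      have hE : daE hpd s h := by
        rw [daE_iff]
        exact ⟨hcond.1, hnp0 h, hcond.2⟩
      have hInv' := daInv_step hpd rr h s hInv hE
      have hNFP := daNFP_step hpd rr RRI s h hInv hE
      have hmeas := daMeas_step_lt hpd rr h s hE
      by_cases hcond2 : h ∈ al.getD (PySem.List.pyGetD (hpd.getD h []) (s.np.getD h 0) "") ([] : PySem.Set String) ∧
          s.held.getD (PySem.List.pyGetD (hpd.getD h []) (s.np.getD h 0) "") none ≠ some h
      · rw [if_pos hcond2]
        rw [htgt] at hcond2
        have hAl' : AliveInv rr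
            (al.insert (daTgt hpd h s) ((al.getD (daTgt hpd h s) ([] : PySem.Set String)).filter
              (fun x => decide ((rr.getD (daTgt hpd h s) PySem.Dict.empty).getD x 0 ≤ (rr.getD (daTgt hpd h s) PySem.Dict.empty).getD h 0))))
            (daStep hpd rr h s).held := by
          rw [daStep_held_eq, bout_accept hpd rr RRI al h s hInv hAl hcond2.1 hcond2.2, maybeIns_some]
          exact aliveInv_accept rr al s.held (daTgt hpd h s) h hAl hcond2.1
        rcases hheld : s.held.getD (PySem.List.pyGetD (hpd.getD h []) (s.np.getD h 0) "") none with _ | c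
        · -- fresh accept
          simp only [hheld]
          rw [htgt] at hheld
          have ho : daOut hpd rr h s = some none := by
            rw [bout_accept hpd rr RRI al h s hInv hAl hcond2.1 hcond2.2, hheld]
          have hsteq := bstep_accept_none hpd rr RRI al h s hInv hAl hcond2.1 hheld
          rw [htgt, hsteq]
          have hcov' : ∀ h', daE hpd (daStep hpd rr h s) h' → h' ∈ pending ∨ h' = h ∨ h' ∈ X := by
            intro h' hE'
            by_cases hh : h' = h
            · exact Or.inr (Or.inl hh)
            · exact hcov h' (daE_back hpd rr h s h' hh (fun c hc => by rw [ho] at hc; cases hc) hE')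
          obtain ⟨r1, r2, r3, r4, r5⟩ := ih h pending (daStep hpd rr h s) _ X hInv' hAl' hcov' (by omega)
          exact ⟨r1.trans hNFP, r2, r3, r4, by omega⟩
        · -- displacement
          simp only [hheld]
          rw [htgt] at hheld
          have ho : daOut hpd rr h s = some (some c) := by
            rw [bout_accept hpd rr RRI al h s hInv hAl hcond2.1 hcond2.2, hheld]
          have hsteq := bstep_accept_some hpd rr RRI al h c s hInv hAl hcond2.1 hheld hcond2.2
          have hrem_eq : (s.rem.insert h (s.rem.getD h 0 - 1)).insert c ((s.rem.insert h (s.rem.getD h 0 - 1)).getD c 0 + 1) = (daStep hpd rr h s).rem :=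
            congrArg DASt.rem hsteq
          have hnp_eq : s.np.insert h (s.np.getD h 0 + 1) = (daStep hpd rr h s).np :=
            congrArg DASt.np hsteq
          rw [htgt]
          simp only [hsteq]
          simp only [hrem_eq, hnp_eq]
          have hch : c ≠ h := fun he => hcond2.2 (by rw [hheld, he])
          have hcov' : ∀ h', daE hpd (daStep hpd rr h s) h' →
              h' ∈ (if (daStep hpd rr h s).rem.getD c 0 = 1 ∧ (daStep hpd rr h s).np.getD c 0 < ((hpd.getD c []).length : Int)
                    then pending ++ [c] else pending) ∨ h' = h ∨ h' ∈ X := by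
            intro h' hE'
            by_cases hh : h' = h
            · exact Or.inr (Or.inl hh)
            · by_cases hc : h' = c
              · subst hc
                rw [daE_iff] at hE'
                by_cases hone : (daStep hpd rr h s).rem.getD h' 0 = 1
                · rw [if_pos ⟨hone, hE'.2.2⟩]
                  exact Or.inl (List.mem_append_right _ (by simp))
                · have hrem : (daStep hpd rr h s).rem.getD h' 0 = s.rem.getD h' 0 + 1 := by
                    rw [daStep_rem_eq, ho, remEff_some_some, getD_dbump, if_pos rfl,
                       getD_dbump, if_neg hch]
                  have hEs : daE hpd s h' := by
                    rw [daE_iff]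
                    refine ⟨by omega, hnp0 h', ?_⟩
                    have := hE'.2.2
                    rwa [daStep_np_getD_ne hpd rr h h' s hch] at this
                  rcases hcov h' hEs with h1 | h1
                  · exact Or.inl (by split <;> [exact List.mem_append_left _ h1; exact h1])
                  · rcases h1 with h1 | h1
                    · exact absurd h1 hch
                    · exact Or.inr (Or.inr h1)
              · have hEs := daE_back hpd rr h s h' hh
                  (fun c' hc' => by
                    rw [ho] at hc'
                    obtain rfl : c' = c := by simpa using hc'.symm
                    exact hc) hE'
                rcases hcov h' hEs with h1 | h1
                · exact Or.inl (by split <;> [exact List.mem_append_left _ h1; exact h1])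
                · exact Or.inr h1
          have hplen : (if (daStep hpd rr h s).rem.getD c 0 = 1 ∧ (daStep hpd rr h s).np.getD c 0 < ((hpd.getD c []).length : Int)
                then pending ++ [c] else pending).length ≤ pending.length + 1 := by
            split <;> simp
          obtain ⟨r1, r2, r3, r4, r5⟩ := ih h _ (daStep hpd rr h s) _ X hInv' hAl' hcov' (by omega)
          exact ⟨r1.trans hNFP, r2, r3, r4, by omega⟩
      · rw [if_neg hcond2]
        rw [htgt] at hcond2
        have hskip : h ∉ al.getD (daTgt hpd h s) ([] : PySem.Set String) ∨ s.held.getD (daTgt hpd h s) none = some h := by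
          by_cases hm : h ∈ al.getD (daTgt hpd h s) ([] : PySem.Set String)
          · right
            by_contra hx
            exact hcond2 ⟨hm, hx⟩
          · exact Or.inl hm
        have ho : daOut hpd rr h s = none := bout_none hpd rr al h s hAl hskip
        have hsteq := bstep_skip hpd rr al h s hAl hskip
        rw [hsteq]
        have hAl' : AliveInv rr al (daStep hpd rr h s).held := by
          rw [daStep_held_eq, ho, maybeIns_none]
          exact hAl
        have hcov' : ∀ h', daE hpd (daStep hpd rr h s) h' → h' ∈ pending ∨ h' = h ∨ h' ∈ X := by
          intro h' hE'
          by_cases hh : h' = h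
          · exact Or.inr (Or.inl hh)
          · exact hcov h' (daE_back hpd rr h s h' hh (fun c hc => by rw [ho] at hc; cases hc) hE')
        obtain ⟨r1, r2, r3, r4, r5⟩ := ih h pending (daStep hpd rr h s) al X hInv' hAl' hcov' (by omega)
        exact ⟨r1.trans hNFP, r2, r3, r4, by omega⟩
    · rw [if_neg hcond]
      refine ⟨rfl, hInv, hAl, ?_, le_refl _⟩
      intro h' hE'
      rcases hcov h' hE' with h1 | h1
      · exact Or.inl h1
      · rcases h1 with h1 | h1
        · subst h1
          rw [daE_iff] at hE'
          exact absurd ⟨hE'.1, hE'.2.2⟩ hcond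
        · exact Or.inr h1

theorem loopBpend_spec (hpd : PySem.Dict String (List String)) (rr : PySem.Dict String (PySem.Dict String Int))
    (RRI : ∀ r, RankInj (rr.getD r PySem.Dict.empty)) :
    ∀ fuel (pending : List String) (s : DASt) (al : PySem.Dict String (PySem.Set String)) (X : List String),
      daInv hpd rr s → AliveInv rr al s.held →
      (∀ h', daE hpd s h' → h' ∈ pending ∨ h' ∈ X) → pending.length + daMeas hpd s < fuel →
      daNFP hpd rr (loopBpend hpd rr fuel pending s al).1 = daNFP hpd rr s ∧
      daInv hpd rr (loopBpend hpd rr fuel pending s al).1 ∧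
      AliveInv rr (loopBpend hpd rr fuel pending s al).2 (loopBpend hpd rr fuel pending s al).1.held ∧
      (∀ h', daE hpd (loopBpend hpd rr fuel pending s al).1 h' → h' ∈ X) := by
  intro fuel
  induction fuel with
  | zero =>
    intro pending s al X _ _ _ hlt
    omega
  | succ f ih =>
    intro pending s al X hInv hAl hcov hlt
    simp only [loopBpend]
    rcases hlast : pending.getLast? with _ | h
    · have hfree : pending = [] := List.getLast?_eq_none_iff.mp hlast
      subst hfree
      exact ⟨rfl, hInv, hAl, fun h' hE' => by
        rcases hcov h' hE' with h1 | h1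
        · simp at h1
        · exact h1⟩
    · have hdecomp : pending.dropLast ++ [h] = pending := List.dropLast_append_getLast? h hlast
      have hcov' : ∀ h', daE hpd s h' → h' ∈ pending.dropLast ∨ h' = h ∨ h' ∈ X := by
        intro h' hE'
        rcases hcov h' hE' with h1 | h1
        · rw [← hdecomp] at h1
          rcases List.mem_append.mp h1 with h2 | h2
          · exact Or.inl h2
          · exact Or.inr (Or.inl (List.mem_singleton.mp h2))
        · exact Or.inr (Or.inr h1)
      obtain ⟨ih1, ih2, ih3, ih4, ih5⟩ := loopBin_spec hpd rr RRI (daMeas hpd s + 1) h pending.dropLast s al X hInv hAl hcov' (by omega)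
      have hfl : pending.dropLast.length + 1 = pending.length := by
        rw [← hdecomp]
        simp
      have hcovX : ∀ h', daE hpd (loopBin hpd rr (daMeas hpd s + 1) h pending.dropLast s al).2.1 h' →
          h' ∈ (loopBin hpd rr (daMeas hpd s + 1) h pending.dropLast s al).1 ∨ h' ∈ X := ih4
      obtain ⟨r1, r2, r3, r4⟩ := ih (loopBin hpd rr (daMeas hpd s + 1) h pending.dropLast s al).1
        (loopBin hpd rr (daMeas hpd s + 1) h pending.dropLast s al).2.1
        (loopBin hpd rr (daMeas hpd s + 1) h pending.dropLast s al).2.2 X ih2 ih3 hcovX (by omega)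
      exact ⟨r1.trans ih1, r2, r3, r4⟩

-- B's outer for-loop over all hospitals ends in the normal form
theorem loopBfor_spec (hpd : PySem.Dict String (List String)) (rr : PySem.Dict String (PySem.Dict String Int))
    (RRI : ∀ r, RankInj (rr.getD r PySem.Dict.empty)) :
    ∀ (l : List String) (s : DASt) (al : PySem.Dict String (PySem.Set String)),
      daInv hpd rr s → AliveInv rr al s.held → (∀ h', daE hpd s h' → h' ∈ l) →
      (l.foldl (fun (st : DASt × PySem.Dict String (PySem.Set String)) h0 =>
        loopBpend hpd rr (daMeas hpd st.1 + 2) [h0] st.1 st.2) (s, al)).1 = daNFP hpd rr s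
  | [], s, al, hInv, _, hcov => by
    have hno : ∀ x, ¬ daE hpd s x := fun x hx => by simpa using hcov x hx
    rw [daNFP_fix hpd rr s hno]
    rfl
  | h0 :: l, s, al, hInv, hAl, hcov => by
    rw [List.foldl_cons]
    have hcov' : ∀ h', daE hpd s h' → h' ∈ [h0] ∨ h' ∈ l := by
      intro h' hE'
      rcases List.mem_cons.mp (hcov h' hE') with h1 | h1
      · exact Or.inl (by simp [h1])
      · exact Or.inr h1
    obtain ⟨p1, p2, p3, p4⟩ := loopBpend_spec hpd rr RRI (daMeas hpd s + 2) [h0] s al l hInv hAl hcov' (by simp; omega)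
    have := loopBfor_spec hpd rr RRI l
      (loopBpend hpd rr (daMeas hpd s + 2) [h0] s al).1
      (loopBpend hpd rr (daMeas hpd s + 2) [h0] s al).2 p2 p3 p4
    rw [this, p1]

-- ---------- association-list / initial-state facts ----------

theorem keys_pairFold {ν μ : Type} (v : (String × ν) → μ) (l : List (String × ν)) :
    (l.foldl (fun d p => d.insert p.1 (v p)) PySem.Dict.empty).keys = PySem.Set.ofList (l.map Prod.fst) := by
  rw [PySem.Dict.keys_foldl_insert_key l Prod.fst (fun _ p => v p) PySem.Dict.empty]
  simp [PySem.Dict.keys_empty, PySem.Set.update_nil_left]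

theorem nodup_keys_pairFold {ν μ : Type} (v : (String × ν) → μ) (l : List (String × ν)) :
    (l.foldl (fun d p => d.insert p.1 (v p)) PySem.Dict.empty).keys.Nodup :=
  PySem.Dict.nodup_keys_foldl_insert_key l Prod.fst (fun _ p => v p) PySem.Dict.empty PySem.Dict.nodup_keys_empty

theorem getD_pairFold {ν μ : Type} (v : (String × ν) → μ) (l : List (String × ν))
    (hnd : (l.map Prod.fst).Nodup) (p : String × ν) (hp : p ∈ l) (dflt : μ) :
    (l.foldl (fun d pr => d.insert pr.1 (v pr)) PySem.Dict.empty).getD p.1 dflt = v p := by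
  have hitems := PySem.Dict.items_foldl_insert_fresh l Prod.fst v
    (PySem.Dict.empty : PySem.Dict String μ) (fun a _ => rfl) hnd
  have hmem : (p.1, v p) ∈ (l.foldl (fun d pr => d.insert pr.1 (v pr)) (PySem.Dict.empty : PySem.Dict String μ)).items := by
    rw [hitems]
    refine List.mem_append_right _ ?_
    exact List.mem_map.mpr ⟨p, hp, rfl⟩
  have hnd2 : (l.foldl (fun d pr => d.insert pr.1 (v pr)) (PySem.Dict.empty : PySem.Dict String μ)).keys.Nodup := by
    have hk : (l.foldl (fun d pr => d.insert pr.1 (v pr)) (PySem.Dict.empty : PySem.Dict String μ)).keys = l.map Prod.fst := by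
      rw [keys_pairFold]
      exact PySem.Set.ofList_eq_self_of_nodup _ hnd
    rw [hk]
    exact hnd
  exact PySem.Dict.getD_of_mem_items _ hmem hnd2 dflt

theorem ofList_getD (l : List (String × List String)) (hnd : (l.map Prod.fst).Nodup)
    (p : String × List String) (hp : p ∈ l) (dflt : List String) :
    (PySem.Dict.ofList l).getD p.1 dflt = p.2 := by
  unfold PySem.Dict.ofList PySem.Dict.update
  exact getD_pairFold Prod.snd l hnd p hp dflt

theorem keys_ofList_pairs {ν : Type} (l : List (String × ν)) :
    (PySem.Dict.ofList l).keys = PySem.Set.ofList (l.map Prod.fst) := by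
  unfold PySem.Dict.ofList PySem.Dict.update
  rw [PySem.Dict.keys_foldl_insert_key l Prod.fst (fun _ p => p.2) PySem.Dict.empty]
  simp [PySem.Dict.keys_empty, PySem.Set.update_nil_left]

-- ---------- sorted2 with a constant first key is a plain sort ----------

theorem insertBy_congr (b1 b2 : String → String → Bool) (x : String) :
    ∀ ys : List String, (∀ y ∈ ys, b1 x y = b2 x y) →
      PySem.List.insertBy b1 x ys = PySem.List.insertBy b2 x ys
  | [], _ => rfl
  | y :: ys, h => by
    show (if b1 x y = true then x :: y :: ys else y :: PySem.List.insertBy b1 x ys) =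
      (if b2 x y = true then x :: y :: ys else y :: PySem.List.insertBy b2 x ys)
    rw [h y (by simp), insertBy_congr b1 b2 x ys (fun z hz => h z (by simp [hz]))]

theorem mem_insertBy_sub (b : String → String → Bool) (x : String) :
    ∀ ys : List String, ∀ z ∈ PySem.List.insertBy b x ys, z = x ∨ z ∈ ys
  | [], z, hz => by
    simpa [PySem.List.insertBy] using hz
  | y :: ys, z, hz => by
    rw [show PySem.List.insertBy b x (y :: ys) =
        (if b x y = true then x :: y :: ys else y :: PySem.List.insertBy b x ys) from rfl] at hz
    split at hz
    · rcases List.mem_cons.mp hz with h | h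
      · exact Or.inl h
      · exact Or.inr h
    · rcases List.mem_cons.mp hz with h | h
      · exact Or.inr (by simp [h])
      · rcases mem_insertBy_sub b x ys z h with h' | h'
        · exact Or.inl h'
        · exact Or.inr (by simp [h'])

theorem sorted2_const_k1 (k1 k2 : String → Int) :
    ∀ (xs acc : List String), (∀ x ∈ xs, k1 x = 0) → (∀ x ∈ acc, k1 x = 0) →
      xs.foldl (fun acc x => PySem.List.insertBy
        (fun a b => decide (k1 a < k1 b) || !decide (k1 b < k1 a) && decide (k2 a < k2 b)) x acc) acc =
      xs.foldl (fun acc x => PySem.List.insertBy (fun a b => decide (k2 a < k2 b)) x acc) acc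
  | [], acc, _, _ => rfl
  | x :: xs, acc, hxs, hacc => by
    have hx : k1 x = 0 := hxs x (by simp)
    have hstep : PySem.List.insertBy
        (fun a b => decide (k1 a < k1 b) || !decide (k1 b < k1 a) && decide (k2 a < k2 b)) x acc =
        PySem.List.insertBy (fun a b => decide (k2 a < k2 b)) x acc := by
      refine insertBy_congr _ _ x acc ?_
      intro y hy
      have hy0 := hacc y hy
      simp [hx, hy0]
    rw [List.foldl_cons, List.foldl_cons, hstep]
    refine sorted2_const_k1 k1 k2 xs _ (fun z hz => hxs z (by simp [hz])) ?_
    intro z hz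
    rcases mem_insertBy_sub _ x acc z hz with h | h
    · rw [h]; exact hx
    · exact hacc z h

theorem sorted2_eq_sorted_of_const (xs : List String) (k1 k2 : String → Int)
    (h : ∀ x ∈ xs, k1 x = 0) :
    PySem.List.sorted2 xs k1 k2 false = PySem.List.sorted xs k2 false := by
  rw [PySem.List.sorted_eq_foldl_insertBy]
  exact sorted2_const_k1 k1 k2 xs [] h (by simp)

-- ---------- the two output phases agree on any invariant-satisfying final state ----------

theorem fold_match_filterMap :
    ∀ (l : List (String × Option String)) (d : PySem.Dict String (List String)),
      l.foldl (fun d pr => match pr.2 with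
        | some h => d.modify h [] (fun lst => lst ++ [pr.1])
        | none => d) d =
      (l.filterMap (fun pr => pr.2.map (fun h => (h, pr.1)))).foldl
        (fun d p => d.modify p.1 [] (fun lst => lst ++ [p.2])) d
  | [], _ => rfl
  | pr :: l, d => by
    rcases hpr : pr.2 with _ | h <;>
      simp only [List.foldl_cons, hpr, List.filterMap_cons, Option.map_none, Option.map_some] <;>
      exact fold_match_filterMap l _

theorem filterMap_filter_map (c : String) :
    ∀ l : List (String × Option String),
      ((l.filterMap (fun pr => pr.2.map (fun h => (h, pr.1)))).filter (fun p => p.1 == c)).map (fun p => p.2) =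
      (l.filter (fun pr => pr.2 == some c)).map (fun pr => pr.1)
  | [] => rfl
  | pr :: l => by
    rcases hpr : pr.2 with _ | h
    · simp only [List.filterMap_cons, hpr, Option.map_none, List.filter_cons]
      rw [filterMap_filter_map c l]
      simp
    · simp only [List.filterMap_cons, hpr, Option.map_some, List.filter_cons]
      by_cases hc : h = c
      · rw [hc]
        simp [filterMap_filter_map c l]
      · simp only [show ((h, pr.1).1 == c) = false by simpa using hc,
          show ((some h : Option String) == some c) = false by simpa using hc]
        exact filterMap_filter_map c l

-- held-value membership characterizations for the output phase
theorem mem_lst_iff (sF : DASt) (hndk : sF.held.keys.Nodup) (h x : String) :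
    x ∈ (sF.held.items.filter (fun pr => pr.2 == some h)).map (fun pr => pr.1) ↔
      sF.held.get? x = some (some h) := by
  constructor
  · intro hx
    obtain ⟨pr, hpr, rfl⟩ := List.mem_map.mp hx
    have h2 := List.of_mem_filter hpr
    have h3 : pr.2 = some h := by simpa using h2
    have h4 : pr ∈ sF.held.items := List.mem_of_mem_filter hpr
    rw [← h3]
    exact PySem.Dict.get?_of_mem_items _ (by simpa using h4) hndk
  · intro hx
    have h4 : (x, some h) ∈ sF.held.items := PySem.Dict.mem_items_of_get?_eq_some _ hx
    exact List.mem_map.mpr ⟨(x, some h), List.mem_filter.mpr ⟨h4, by simp⟩, rfl⟩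

-- getD-with-None and get? views of the holder dictionary agree
theorem getD_some_iff_get? (d : PySem.Dict String (Option String)) (r h : String) :
    (d.getD r none = some h) = (d.get? r = some (some h)) := by
  rw [PySem.Dict.getD_eq_get?_getD]
  cases hd : d.get? r <;> simp

-- the per-hospital equality: stable sort by rank = scan of the preference list
theorem perHospital (rp hp : List (String × List String)) (sF : DASt)
    (hnd_hp : (hp.map Prod.fst).Nodup)
    (hInvF : daInv (PySem.Dict.ofList hp) (daRR rp) sF)
    (p : String × List String) (hp_mem : p ∈ hp) :
    PySem.List.sorted2 ((sF.held.items.filter (fun pr => pr.2 == some p.1)).map (fun pr => pr.1))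
      (fun r => if (daRank p.2).contains r then (0 : Int) else 1)
      (fun r => (daRank p.2).getD r 0) false =
    ((PySem.List.enumerate p.2 0).filter
        (fun e => decide ((daRank p.2).getD e.2 0 = e.1 ∧ sF.held.get? e.2 = some (some p.1)))).map
      (fun e => e.2) := by
  have hndk : sF.held.keys.Nodup := hInvF.2.1
  have hhold := hInvF.2.2.2.2.2.2.2
  -- every held resident is on p's preference list
  have hmemp : ∀ x, sF.held.get? x = some (some p.1) → x ∈ p.2 := by
    intro x hx
    have hgd : sF.held.getD x none = some p.1 := by
      rw [PySem.Dict.getD_eq_get?_getD, hx]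
      rfl
    have := (hhold x p.1 hgd).2.2.1
    rwa [ofList_getD hp hnd_hp p hp_mem []] at this
  have hcond : ∀ e ∈ (PySem.List.enumerate p.2 0).filter
      (fun e => decide ((daRank p.2).getD e.2 0 = e.1 ∧ sF.held.get? e.2 = some (some p.1))),
      (daRank p.2).getD e.2 0 = e.1 ∧ sF.held.get? e.2 = some (some p.1) := by
    intro e he
    simpa using List.of_mem_filter he
  -- scan membership
  have hmem_scan : ∀ x, x ∈ ((PySem.List.enumerate p.2 0).filter
      (fun e => decide ((daRank p.2).getD e.2 0 = e.1 ∧ sF.held.get? e.2 = some (some p.1)))).map (fun e => e.2) ↔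
      sF.held.get? x = some (some p.1) := by
    intro x
    constructor
    · intro hx
      obtain ⟨e, he, rfl⟩ := List.mem_map.mp hx
      exact (hcond e he).2
    · intro hx
      obtain ⟨i, hi_mem, hi_val⟩ := daRank_getD_mem p.2 x (hmemp x hx)
      refine List.mem_map.mpr ⟨((i : Int), x), List.mem_filter.mpr ⟨hi_mem, ?_⟩, rfl⟩
      exact decide_eq_true ⟨hi_val, hx⟩
  -- first, the 0/1-key is constantly 0 on the sorted list
  rw [sorted2_eq_sorted_of_const _ _ _ ?_]
  · -- then name the sorted order
    refine PySem.List.sorted_eq_of_perm_of_pairwise_lt _ _ _ ?_ ?_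
    · -- permutation: same members, both without duplicates
      have hnd1 : ((sF.held.items.filter (fun pr => pr.2 == some p.1)).map (fun pr => pr.1)).Nodup := by
        have hsub : ((sF.held.items.filter (fun pr => pr.2 == some p.1)).map (fun pr => pr.1)).Sublist
            (sF.held.items.map (fun pr => pr.1)) := List.Sublist.map _ List.filter_sublist
        exact hsub.nodup hndk
      have hpw : ((PySem.List.enumerate p.2 0).filter
          (fun e => decide ((daRank p.2).getD e.2 0 = e.1 ∧ sF.held.get? e.2 = some (some p.1)))).Pairwise
          (fun a b => a.1 < b.1) := List.Pairwise.sublist List.filter_sublist (pairwise_enumerate p.2 0)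
      have hne2 : ((PySem.List.enumerate p.2 0).filter
          (fun e => decide ((daRank p.2).getD e.2 0 = e.1 ∧ sF.held.get? e.2 = some (some p.1)))).Pairwise
          (fun a b => a.2 ≠ b.2) := by
        refine hpw.imp_of_mem ?_
        intro a b ha hb hlt heq
        have h1 := (hcond a ha).1
        have h2 := (hcond b hb).1
        rw [heq] at h1
        rw [h1] at h2
        omega
      have hnd2 : (((PySem.List.enumerate p.2 0).filter
          (fun e => decide ((daRank p.2).getD e.2 0 = e.1 ∧ sF.held.get? e.2 = some (some p.1)))).map
          (fun e => e.2)).Nodup := by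
        unfold List.Nodup
        exact List.pairwise_map.mpr hne2
      refine (List.perm_ext_iff_of_nodup hnd2 hnd1).mpr ?_
      intro x
      rw [hmem_scan x, mem_lst_iff sF hndk p.1 x]
    · -- strictly increasing ranks along the scan
      have hpw : ((PySem.List.enumerate p.2 0).filter
          (fun e => decide ((daRank p.2).getD e.2 0 = e.1 ∧ sF.held.get? e.2 = some (some p.1)))).Pairwise
          (fun a b => a.1 < b.1) := List.Pairwise.sublist List.filter_sublist (pairwise_enumerate p.2 0)
      rw [List.pairwise_map]
      refine hpw.imp_of_mem ?_
      intro a b ha hb hab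
      rw [(hcond a ha).1, (hcond b hb).1]
      exact hab
  · intro x hx
    rw [mem_lst_iff sF hndk p.1 x] at hx
    rw [if_pos ((daRank_contains p.2 x).mpr (hmemp x hx))]

-- the initial state satisfies the invariant
theorem daInit_inv (rp hp : List (String × List String)) (q : List (String × Int))
    (hPre : Pre_hospital_proposing_da_py rp hp q) :
    daInv (PySem.Dict.ofList hp) (daRR rp) (daInit rp hp q) := by
  obtain ⟨hnd_rp, hnd_hp, hnd_q, hquota⟩ := hPre
  have hkeys_hpd : (PySem.Dict.ofList hp).keys = PySem.Set.ofList (hp.map Prod.fst) := keys_ofList_pairs hp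
  have hnp_def : (daInit rp hp q).np = hp.foldl (fun d p => d.insert p.1 ((fun _ => (0 : Int)) p)) PySem.Dict.empty := rfl
  have hheld_def : (daInit rp hp q).held = rp.foldl (fun d p => d.insert p.1 ((fun _ => (none : Option String)) p)) PySem.Dict.empty := rfl
  have hrem_def : (daInit rp hp q).rem = PySem.Dict.ofList q := rfl
  refine ⟨?_, ?_, ?_, ?_, ?_, ?_, ?_, ?_⟩
  · rw [hnp_def]
    exact nodup_keys_pairFold _ hp
  · rw [hheld_def]
    exact nodup_keys_pairFold _ rp
  · rw [hrem_def]
    exact PySem.Dict.nodup_keys_ofList q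
  · intro h hmem
    rw [hnp_def, PySem.Dict.contains_iff_mem_keys, keys_pairFold]
    rw [hkeys_hpd, PySem.Set.mem_ofList] at hmem
    rwa [PySem.Set.mem_ofList]
  · intro h hmem
    rw [hkeys_hpd, PySem.Set.mem_ofList] at hmem
    obtain ⟨pp, hpp, rfl⟩ := List.mem_map.mp hmem
    rw [hrem_def, PySem.Dict.contains_iff_mem_keys, keys_ofList_pairs, PySem.Set.mem_ofList]
    exact hquota pp hpp
  · intro r hr
    rw [PySem.Dict.contains_iff_mem_keys] at hr
    unfold daRR at hr
    rw [keys_pairFold, PySem.Set.mem_ofList] at hr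
    rw [hheld_def, PySem.Dict.contains_iff_mem_keys, keys_pairFold, PySem.Set.mem_ofList]
    exact hr
  · intro h
    rw [show (daInit rp hp q).np = hp.foldl (fun d p => d.insert p.1 (0 : Int)) PySem.Dict.empty from rfl]
    exact getD_foldl_insert_prop (fun v => 0 ≤ v) Prod.fst (fun _ => (0 : Int)) 0 hp
      PySem.Dict.empty (fun k => by simp [PySem.Dict.getD_empty]) (fun _ _ => le_refl 0) h
  · intro r c hr
    have := getD_foldl_insert_prop (fun v => v = (none : Option String)) Prod.fst
      (fun _ => (none : Option String)) none rp PySem.Dict.empty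
      (fun k => by simp [PySem.Dict.getD_empty]) (fun _ _ => rfl) r
    rw [show (daInit rp hp q).held = rp.foldl (fun d p => d.insert p.1 (none : Option String)) PySem.Dict.empty from rfl] at hr
    rw [hr] at this
    cases this

-- the initial holder dictionary holds nobody
theorem daInit_held_none (rp hp : List (String × List String)) (q : List (String × Int)) (r : String) :
    (daInit rp hp q).held.getD r none = none := by
  have := getD_foldl_insert_prop (fun v => v = (none : Option String)) Prod.fst
    (fun _ => (none : Option String)) none rp PySem.Dict.empty
    (fun k => by simp [PySem.Dict.getD_empty]) (fun _ _ => rfl) r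
  exact this

-- the initial alive sets are exactly the key sets of the rank dictionaries
theorem daAlive0_getD (rr : PySem.Dict String (PySem.Dict String Int)) (hnd : rr.keys.Nodup) (r : String) :
    (daAlive0 rr).getD r ([] : PySem.Set String) = PySem.Set.ofList ((rr.getD r PySem.Dict.empty).keys) := by
  have hkm : rr.items.map Prod.fst = rr.keys := rfl
  have hnd_items : (rr.items.map Prod.fst).Nodup := by rw [hkm]; exact hnd
  by_cases hcr : rr.contains r = true
  · obtain ⟨v, hv⟩ : ∃ v, rr.get? r = some v := by
      have := PySem.Dict.contains_eq_isSome_get? rr r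
      rw [hcr] at this
      exact Option.isSome_iff_exists.mp this.symm
    have hmem_items : (r, v) ∈ rr.items := PySem.Dict.mem_items_of_get?_eq_some _ hv
    have h1 : (daAlive0 rr).getD r ([] : PySem.Set String) = PySem.Set.ofList v.keys := by
      unfold daAlive0
      exact getD_pairFold (fun pr => PySem.Set.ofList pr.2.keys) rr.items hnd_items (r, v) hmem_items []
    have h2 : rr.getD r PySem.Dict.empty = v := PySem.Dict.getD_of_mem_items _ hmem_items hnd _
    rw [h1, h2]
  · have hcf : rr.contains r = false := by revert hcr; cases rr.contains r <;> simp
    have hck : (daAlive0 rr).contains r = false := by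
      by_contra hcc
      have hc' : (daAlive0 rr).contains r = true := by
        revert hcc; cases (daAlive0 rr).contains r <;> simp
      have hkeys : (daAlive0 rr).keys = PySem.Set.ofList (rr.items.map Prod.fst) := by
        unfold daAlive0
        exact keys_pairFold (fun pr => PySem.Set.ofList pr.2.keys) rr.items
      have := (PySem.Dict.contains_iff_mem_keys _ _).mp hc'
      rw [hkeys, PySem.Set.mem_ofList, hkm] at this
      rw [(PySem.Dict.contains_iff_mem_keys _ _).mpr this] at hcf
      cases hcf
    rw [PySem.Dict.getD_of_not_contains _ _ hck, PySem.Dict.getD_of_not_contains _ _ hcf]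
    rfl

-- the initial alive sets satisfy the invariant
theorem daAlive0_inv (rp hp : List (String × List String)) (q : List (String × Int)) :
    AliveInv (daRR rp) (daAlive0 (daRR rp)) (daInit rp hp q).held := by
  intro r x
  rw [daInit_held_none rp hp q r]
  have hnd_keys : (daRR rp).keys.Nodup := nodup_keys_pairFold (fun p => daRank p.2) rp
  rw [daAlive0_getD (daRR rp) hnd_keys r, PySem.Set.mem_ofList,
     ← PySem.Dict.contains_iff_mem_keys]
  constructor
  · intro hx
    exact ⟨hx, fun c hc => by cases hc⟩
  · intro hx
    exact hx.1

theorem set_update_self (s : PySem.Set String) (xs : List String)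
    (h : ∀ x ∈ xs, x ∈ s) : PySem.Set.update s xs = s := by
  rw [PySem.Set.update_eq_append_filter]
  have : (PySem.Set.ofList xs).filter (fun y => !PySem.Set.contains s y) = [] := by
    rw [List.filter_eq_nil_iff]
    intro y hy
    have hmem : y ∈ s := h y ((PySem.Set.mem_ofList xs y).mp hy)
    simp [PySem.Set.contains_eq_listContains, hmem]
  rw [this, List.append_nil]

-- the two output phases agree on any final state satisfying the invariant
theorem out_eq (rp hp : List (String × List String)) (sF : DASt)
    (hnd_hp : (hp.map Prod.fst).Nodup)
    (hInvF : daInv (PySem.Dict.ofList hp) (daRR rp) sF) :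
    ((sF.held.items.foldl
        (fun d pr => match pr.2 with
          | some h => d.modify h [] (fun lst => lst ++ [pr.1])
          | none => d)
        (hp.foldl (fun d p => d.insert p.1 ([] : List String)) PySem.Dict.empty)).keys.foldl
      (fun d h => d.modify h []
        (fun lst => PySem.List.sorted2 lst
          (fun r => if ((hp.foldl (fun d p => d.insert p.1 (daRank p.2)) PySem.Dict.empty).getD h PySem.Dict.empty).contains r then (0 : Int) else 1)
          (fun r => ((hp.foldl (fun d p => d.insert p.1 (daRank p.2)) PySem.Dict.empty).getD h PySem.Dict.empty).getD r 0) false))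
      (sF.held.items.foldl
        (fun d pr => match pr.2 with
          | some h => d.modify h [] (fun lst => lst ++ [pr.1])
          | none => d)
        (hp.foldl (fun d p => d.insert p.1 ([] : List String)) PySem.Dict.empty))).items =
    hp.foldl
      (fun out p =>
        out ++ [(p.1, (PySem.List.enumerate p.2 0).foldl
          (fun acc e => if (daRank p.2).getD e.2 0 = e.1 ∧ sF.held.get? e.2 = some (some p.1) then acc ++ [e.2] else acc) [])])
      [] := by
  have hndk : sF.held.keys.Nodup := hInvF.2.1
  have hhold := hInvF.2.2.2.2.2.2.2
  have hheld1 := fold_match_filterMap sF.held.items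
    (hp.foldl (fun d p => d.insert p.1 ([] : List String)) PySem.Dict.empty)
  have hkeys_base : (hp.foldl (fun d p => d.insert p.1 ([] : List String)) PySem.Dict.empty).keys = hp.map Prod.fst := by
    rw [keys_pairFold]
    exact PySem.Set.ofList_eq_self_of_nodup _ hnd_hp
  -- holder hospitals appear among hp's keys
  have hl'keys : ∀ x ∈ (sF.held.items.filterMap (fun pr => pr.2.map (fun h => (h, pr.1)))).map Prod.fst,
      x ∈ hp.map Prod.fst := by
    intro x hx
    obtain ⟨pr', hpr', rfl⟩ := List.mem_map.mp hx
    obtain ⟨pr, hpr, heq⟩ := List.mem_filterMap.mp hpr'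
    obtain ⟨c, hc, rfl⟩ := Option.map_eq_some_iff.mp heq
    have hget : sF.held.get? pr.1 = some (some c) := by
      have : (pr.1, pr.2) ∈ sF.held.items := by simpa using hpr
      rw [hc] at this
      exact PySem.Dict.get?_of_mem_items _ this hndk
    have hgd : sF.held.getD pr.1 none = some c := by
      rw [PySem.Dict.getD_eq_get?_getD, hget]
      rfl
    have := (hhold pr.1 c hgd).1
    rw [keys_ofList_pairs, PySem.Set.mem_ofList] at this
    exact this
  have hkeys_held1 : (sF.held.items.foldl
      (fun d pr => match pr.2 with
        | some h => d.modify h [] (fun lst => lst ++ [pr.1])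
        | none => d)
      (hp.foldl (fun d p => d.insert p.1 ([] : List String)) PySem.Dict.empty)).keys = hp.map Prod.fst := by
    rw [hheld1, PySem.Dict.keys_foldl_modify_key _ Prod.fst [] (fun _ p lst => lst ++ [p.2]), hkeys_base]
    exact set_update_self _ _ hl'keys
  have hgetD_held1 : ∀ h, (sF.held.items.foldl
      (fun d pr => match pr.2 with
        | some h => d.modify h [] (fun lst => lst ++ [pr.1])
        | none => d)
      (hp.foldl (fun d p => d.insert p.1 ([] : List String)) PySem.Dict.empty)).getD h [] =
      (sF.held.items.filter (fun pr => pr.2 == some h)).map (fun pr => pr.1) := by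
    intro h
    rw [hheld1, PySem.Dict.getD_foldl_modify_append, filterMap_filter_map]
    have hbase : (hp.foldl (fun d p => d.insert p.1 ([] : List String)) PySem.Dict.empty).getD h [] = [] :=
      getD_foldl_insert_prop (fun v => v = []) Prod.fst (fun _ => []) [] hp PySem.Dict.empty
        (fun k => by simp [PySem.Dict.getD_empty]) (fun _ _ => rfl) h
    rw [hbase, List.nil_append]
  have hnd_keys1 : (sF.held.items.foldl
      (fun d pr => match pr.2 with
        | some h => d.modify h [] (fun lst => lst ++ [pr.1])
        | none => d)
      (hp.foldl (fun d p => d.insert p.1 ([] : List String)) PySem.Dict.empty)).keys.Nodup := by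
    rw [hkeys_held1]
    exact hnd_hp
  have hkeys_sort : ((sF.held.items.foldl
      (fun d pr => match pr.2 with
        | some h => d.modify h [] (fun lst => lst ++ [pr.1])
        | none => d)
      (hp.foldl (fun d p => d.insert p.1 ([] : List String)) PySem.Dict.empty)).keys.foldl
      (fun d h => d.modify h [] ((fun h lst => PySem.List.sorted2 lst
        (fun r => if ((hp.foldl (fun d p => d.insert p.1 (daRank p.2)) PySem.Dict.empty).getD h PySem.Dict.empty).contains r then (0 : Int) else 1)
        (fun r => ((hp.foldl (fun d p => d.insert p.1 (daRank p.2)) PySem.Dict.empty).getD h PySem.Dict.empty).getD r 0) false) h)) (sF.held.items.foldl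
      (fun d pr => match pr.2 with
        | some h => d.modify h [] (fun lst => lst ++ [pr.1])
        | none => d)
      (hp.foldl (fun d p => d.insert p.1 ([] : List String)) PySem.Dict.empty))).keys = hp.map Prod.fst := by
    rw [PySem.Dict.keys_foldl_modify _ [] (fun _ h lst => (fun h lst => PySem.List.sorted2 lst
        (fun r => if ((hp.foldl (fun d p => d.insert p.1 (daRank p.2)) PySem.Dict.empty).getD h PySem.Dict.empty).contains r then (0 : Int) else 1)
        (fun r => ((hp.foldl (fun d p => d.insert p.1 (daRank p.2)) PySem.Dict.empty).getD h PySem.Dict.empty).getD r 0) false) h lst), set_update_self _ _ (fun x hx => hx)]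
    exact hkeys_held1
  have hnd_sort : ((sF.held.items.foldl
      (fun d pr => match pr.2 with
        | some h => d.modify h [] (fun lst => lst ++ [pr.1])
        | none => d)
      (hp.foldl (fun d p => d.insert p.1 ([] : List String)) PySem.Dict.empty)).keys.foldl
      (fun d h => d.modify h [] ((fun h lst => PySem.List.sorted2 lst
        (fun r => if ((hp.foldl (fun d p => d.insert p.1 (daRank p.2)) PySem.Dict.empty).getD h PySem.Dict.empty).contains r then (0 : Int) else 1)
        (fun r => ((hp.foldl (fun d p => d.insert p.1 (daRank p.2)) PySem.Dict.empty).getD h PySem.Dict.empty).getD r 0) false) h)) (sF.held.items.foldl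
      (fun d pr => match pr.2 with
        | some h => d.modify h [] (fun lst => lst ++ [pr.1])
        | none => d)
      (hp.foldl (fun d p => d.insert p.1 ([] : List String)) PySem.Dict.empty))).keys.Nodup := by
    rw [hkeys_sort]
    exact hnd_hp
  rw [PySem.Dict.items_eq_map_keys _ hnd_sort [], hkeys_sort,
     show hp.foldl
      (fun out p =>
        out ++ [(p.1, (PySem.List.enumerate p.2 0).foldl
          (fun acc e => if (daRank p.2).getD e.2 0 = e.1 ∧ sF.held.get? e.2 = some (some p.1) then acc ++ [e.2] else acc) [])])
      [] =
      hp.map (fun p => (p.1, (PySem.List.enumerate p.2 0).foldl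
          (fun acc e => if (daRank p.2).getD e.2 0 = e.1 ∧ sF.held.get? e.2 = some (some p.1) then acc ++ [e.2] else acc) [])) from by
      rw [PySem.List.foldl_append_singleton_eq_map]
      simp,
     List.map_map]
  apply List.map_congr_left
  intro p hp_mem
  simp only [Function.comp]
  refine congrArg (Prod.mk p.1) ?_
  rw [getD_foldl_modify_once (fun h lst => (fun h lst => PySem.List.sorted2 lst
        (fun r => if ((hp.foldl (fun d p => d.insert p.1 (daRank p.2)) PySem.Dict.empty).getD h PySem.Dict.empty).contains r then (0 : Int) else 1)
        (fun r => ((hp.foldl (fun d p => d.insert p.1 (daRank p.2)) PySem.Dict.empty).getD h PySem.Dict.empty).getD r 0) false) h lst) (sF.held.items.foldl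
      (fun d pr => match pr.2 with
        | some h => d.modify h [] (fun lst => lst ++ [pr.1])
        | none => d)
      (hp.foldl (fun d p => d.insert p.1 ([] : List String)) PySem.Dict.empty)).keys (sF.held.items.foldl
      (fun d pr => match pr.2 with
        | some h => d.modify h [] (fun lst => lst ++ [pr.1])
        | none => d)
      (hp.foldl (fun d p => d.insert p.1 ([] : List String)) PySem.Dict.empty)) hnd_keys1 p.1,
     if_pos (by rw [hkeys_held1]; exact List.mem_map_of_mem hp_mem),
     hgetD_held1 p.1]
  simp only []
  rw [getD_pairFold (fun pr => daRank pr.2) hp hnd_hp p hp_mem PySem.Dict.empty,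
     PySem.List.foldl_append_ite
       (fun e => (daRank p.2).getD e.2 0 = e.1 ∧ sF.held.get? e.2 = some (some p.1))
       (fun e => e.2) (PySem.List.enumerate p.2 0) [],
     List.nil_append]
  exact perHospital rp hp sF hnd_hp hInvF p hp_mem

-- ===== VERDICT =====
theorem hospital_proposing_da_py_spec : Claim_equal_hospital_proposing_da_py := by
  intro rp hp q _hDom hPre
  unfold Spec_hospital_proposing_da_py
  have hnd_hp : (hp.map Prod.fst).Nodup := hPre.2.1
  have hInv0 := daInit_inv rp hp q hPre
  have RRI := daRR_inj rp
  have hcov0A : ∀ h, daE (PySem.Dict.ofList hp) (daInit rp hp q) h →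
      h ∈ (hp.map Prod.fst).filter (fun h => decide (0 < (daInit rp hp q).rem.getD h 0)) := by
    intro h hE
    have hm := daE_mem_keys _ _ _ hE
    rw [keys_ofList_pairs, PySem.Set.mem_ofList] at hm
    rw [daE_iff] at hE
    exact List.mem_filter.mpr ⟨hm, decide_eq_true hE.1⟩
  have hcov0B : ∀ h, daE (PySem.Dict.ofList hp) (daInit rp hp q) h → h ∈ hp.map Prod.fst := by
    intro h hE
    have hm := daE_mem_keys _ _ _ hE
    rwa [keys_ofList_pairs, PySem.Set.mem_ofList] at hm
  have hA : loopA (PySem.Dict.ofList hp) (daRR rp)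
      (((hp.map Prod.fst).filter (fun h => decide (0 < (daInit rp hp q).rem.getD h 0))).length +
        2 * daMeas (PySem.Dict.ofList hp) (daInit rp hp q) + 1)
      ((hp.map Prod.fst).filter (fun h => decide (0 < (daInit rp hp q).rem.getD h 0)))
      (daInit rp hp q) = daNFP (PySem.Dict.ofList hp) (daRR rp) (daInit rp hp q) :=
    loopA_eq (PySem.Dict.ofList hp) (daRR rp) RRI _ _ _ hInv0 hcov0A (by omega)
  have hB : ((hp.map Prod.fst).foldl
      (fun (st : DASt × PySem.Dict String (PySem.Set String)) h0 =>
        loopBpend (PySem.Dict.ofList hp) (daRR rp) (daMeas (PySem.Dict.ofList hp) st.1 + 2) [h0] st.1 st.2)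
      (daInit rp hp q, daAlive0 (daRR rp))).1 = daNFP (PySem.Dict.ofList hp) (daRR rp) (daInit rp hp q) :=
    loopBfor_spec (PySem.Dict.ofList hp) (daRR rp) RRI (hp.map Prod.fst)
      (daInit rp hp q) (daAlive0 (daRR rp)) hInv0 (daAlive0_inv rp hp q) hcov0B
  have hOut := out_eq rp hp (daNFP (PySem.Dict.ofList hp) (daRR rp) (daInit rp hp q)) hnd_hp
    (daNFP_inv (PySem.Dict.ofList hp) (daRR rp) (daInit rp hp q) hInv0)
  show hospital_proposing_da_py rp hp q = hospital_proposing_da_py_alt rp hp q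
  unfold hospital_proposing_da_py hospital_proposing_da_py_alt
  simp only []
  rw [hA, hB]
  simp only [getD_some_iff_get?]
  exact hOut
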